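-- pv_equiv track=rewrite | github.com/jungyoonoh/unit-study | Yoonoh/Baekjoon/Implementation/4991_로봇_청소기.py | setDistanceBetweenDust
-- ===== SOURCE A (Python) =====
-- from collections import deque
--
-- dy = [-1, 0, 1, 0]
--
-- dx = [0, 1, 0, -1]
--
-- def setDistanceBetweenDust(board, dust, L, W, H):
--
--     distanceBetweenDust = [[0 for _ in range(L)] for _ in range(L)]
--
--     for i in range(L):
--         dq = deque()
--         dq.append((dust[i][0], dust[i][1]))
--
--         isVisited = [[False for _ in range(W)] for _ in range(H)]
--         dist = [[-1 for _ in range(W)] for _ in range(H)]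
--
--         isVisited[dust[i][0]][dust[i][1]] = True
--         dist[dust[i][0]][dust[i][1]] = 0
--
--         while dq:
--             y, x = dq.popleft()
--
--             for k in range(4):
--                 ny = y + dy[k]
--                 nx = x + dx[k]
--
--                 if ny < 0 or nx < 0 or ny >= H or nx >= W:
--                     continue
--
--                 if isVisited[ny][nx] or board[ny][nx] == 'x':
--                     continue
--
--                 isVisited[ny][nx] = True
--                 dist[ny][nx] = dist[y][x] + 1
--                 dq.append((ny, nx))
--
--         for j in range(L):
--             distanceBetweenDust[i][j] = dist[dust[j][0]][dust[j][1]]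
--
--     flag = True
--     for i in range(L):
--         if distanceBetweenDust[i].count(-1) >= 1:
--             flag = False
--
--     return distanceBetweenDust, flag
-- ===== SOURCE B (Python) =====
-- def setDistanceBetweenDust(board, dust, L, W, H):
--     # Queue-free re-implementation: per dust source, repeated synchronous (Jacobi)
--     # relaxation sweeps over the whole grid until no cell changes; an unassigned
--     # non-wall cell takes min(assigned neighbour) + 1 each sweep.
--     def neighbors_min(dist, y, x):
--         best = -1
--         for ny, nx in ((y - 1, x), (y + 1, x), (y, x - 1), (y, x + 1)):
--             if 0 <= ny < H and 0 <= nx < W and dist[ny][nx] != -1: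
--                 if best == -1 or dist[ny][nx] < best:
--                     best = dist[ny][nx]
--         return best
--
--     rows = []
--     for i in range(L):
--         sy, sx = dust[i]
--         dist = [[-1] * W for _ in range(H)]
--         dist[sy][sx] = 0
--         changed = True
--         while changed:
--             changed = False
--             new = []
--             for y in range(H):
--                 row = []
--                 for x in range(W):
--                     v = dist[y][x]
--                     if v == -1 and board[y][x] != 'x':
--                         m = neighbors_min(dist, y, x)
--                         if m >= 0:
--                             v = m + 1
--                             changed = True
--                     row.append(v)
--                 new.append(row)
--             dist = new
--         rows.append([dist[y][x] for (y, x) in dust[:L]])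
--     flag = all(-1 not in row for row in rows)
--     return rows, flag
-- ===== Notes on version B (the rewrite author's own statement) =====
-- stated objective: alternative
-- what changed: Replaces A's queue-driven BFS (deque, isVisited array, per-popped-cell neighbour pushes) by a queue-free distance transform: per source, synchronous Jacobi relaxation sweeps that rebuild the whole grid, assigning each unassigned non-wall cell min(assigned neighbour)+1, repeated until a sweep changes nothing; rows are appended directly and the flag computed with all().
-- outside the precondition, e.g. on setDistanceBetweenDust([['.', 'x'], ['x']], [(0, 0)], 1, 2, 2): A returns ([[0]], True), B raises IndexError; on setDistanceBetweenDust([['.'], ['.']], [(-1, 0)], 1, 1, 2): A returns ([[0]], True), B returns ([[0]], True)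
import Mathlib
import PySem

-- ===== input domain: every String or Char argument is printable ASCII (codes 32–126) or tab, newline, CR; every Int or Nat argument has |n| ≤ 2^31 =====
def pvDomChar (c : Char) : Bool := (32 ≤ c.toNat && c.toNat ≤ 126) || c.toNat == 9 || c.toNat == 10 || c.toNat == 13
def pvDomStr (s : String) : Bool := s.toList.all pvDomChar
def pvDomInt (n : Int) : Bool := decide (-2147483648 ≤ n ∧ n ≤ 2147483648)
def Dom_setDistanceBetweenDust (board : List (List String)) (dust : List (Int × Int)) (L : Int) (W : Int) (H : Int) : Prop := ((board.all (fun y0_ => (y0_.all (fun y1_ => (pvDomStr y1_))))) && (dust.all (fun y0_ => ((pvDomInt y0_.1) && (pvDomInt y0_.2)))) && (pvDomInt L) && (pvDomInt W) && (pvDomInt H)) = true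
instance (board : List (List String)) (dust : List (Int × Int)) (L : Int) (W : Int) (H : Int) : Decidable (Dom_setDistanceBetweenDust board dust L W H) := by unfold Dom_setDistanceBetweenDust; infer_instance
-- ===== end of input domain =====

-- B replaces A's deque-driven BFS by a queue-free distance transform: per source,
-- synchronous Jacobi relaxation sweeps rebuild the whole grid (each unassigned non-wall
-- cell takes min(assigned neighbour)+1) until a sweep changes nothing; rows are appended
-- directly and the flag computed with all(); objective: alternative algorithm, not faster.


-- Shared grid primitives (Python `g[y][x]` read / `g[y][x] = v` write; exact for the
-- non-negative in-range indices both programs use on inputs admitted by Pre_).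
def pvG2 {α : Type} (g : List (List α)) (y x : Int) (d : α) : α :=
  (g.getD y.toNat []).getD x.toNat d
def pvS2 {α : Type} (g : List (List α)) (y x : Int) (v : α) : List (List α) :=
  g.modify y.toNat (fun r => r.set x.toNat v)
def pvDy : List Int := [-1, 0, 1, 0]
def pvDx : List Int := [0, 1, 0, -1]
-- number of grid cells satisfying p (termination measure of both main loops)
def pvCnt {α : Type} (p : α → Bool) (g : List (List α)) : Nat :=
  (g.map (fun r => r.countP p)).sum


-- row-level: overwriting a counted cell with an uncounted value drops countP by one
theorem pvCountP_set_flip {α : Type} (p : α → Bool) :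
    ∀ (l : List α) (i : Nat) (v : α) (h : i < l.length),
      p (l[i]'h) = true → p v = false → (l.set i v).countP p + 1 = l.countP p := by
  intro l
  induction l with
  | nil => intro i v h; simp at h
  | cons a t ih =>
    intro i v h hp hv
    cases i with
    | zero => simp_all
    | succ j =>
      simp only [List.set_cons_succ, List.countP_cons]
      have := ih j v (by simpa using h) (by simpa using hp) hv
      omega

-- a pvG2 read that differs from an impossible default certifies both indices in range
theorem pvG2_valid {α : Type} (p : α → Bool) (g : List (List α)) (y x : Int) (d : α)
    (hd : p d = false) (hr : p (pvG2 g y x d) = true) :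
    y.toNat < g.length ∧ x.toNat < (g.getD y.toNat []).length := by
  have hy1 : y.toNat < g.length := by
    by_contra hc
    have hrow : g.getD y.toNat [] = [] := List.getD_eq_default _ _ (by omega)
    rw [pvG2, hrow] at hr
    simp only [List.getD_nil] at hr
    rw [hr] at hd; simp at hd
  refine ⟨hy1, ?_⟩
  by_contra hc
  have : (g.getD y.toNat []).getD x.toNat d = d := List.getD_eq_default _ _ (by omega)
  rw [pvG2, this] at hr
  rw [hr] at hd; simp at hd

theorem pvG2_eq {α : Type} (g : List (List α)) (y x : Int) (d : α)
    (h2 : x.toNat < (g.getD y.toNat []).length) :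
    pvG2 g y x d = (g.getD y.toNat [])[x.toNat]'h2 := by
  rw [pvG2, List.getD_eq_getElem _ _ h2]

-- modifying one row changes pvCnt by the row's countP change
theorem pvCnt_modify {α : Type} (p : α → Bool) :
    ∀ (g : List (List α)) (i : Nat) (f : List α → List α) (h : i < g.length),
      pvCnt p (g.modify i f) + (g[i]'h).countP p = pvCnt p g + (f (g[i]'h)).countP p := by
  intro g
  induction g with
  | nil => intro i f h; simp at h
  | cons r t ih =>
    intro i f h
    cases i with
    | zero =>
      simp only [List.modify_zero_cons, pvCnt, List.map_cons, List.sum_cons, List.getElem_cons_zero]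
      omega
    | succ j =>
      have := ih j f (by simpa using h)
      simp only [List.modify_succ_cons, pvCnt, List.map_cons, List.sum_cons,
        List.getElem_cons_succ] at *
      omega

-- overwrite of a p-cell (read with a non-p default) by a non-p value: pvCnt drops by one
theorem pvCnt_pvS2 {α : Type} (p : α → Bool) (g : List (List α)) (y x : Int) (v d : α)
    (hd : p d = false) (hr : p (pvG2 g y x d) = true) (hv : p v = false) :
    pvCnt p (pvS2 g y x v) + 1 = pvCnt p g := by
  obtain ⟨h1, h2⟩ := pvG2_valid p g y x d hd hr
  have hrow : g.getD y.toNat [] = g[y.toNat]'h1 := List.getD_eq_getElem _ _ h1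
  have hread := pvG2_eq g y x d h2
  have hflip := pvCountP_set_flip p (g.getD y.toNat []) x.toNat v h2 (by rw [← hread]; exact hr) hv
  have hmod := pvCnt_modify p g y.toNat (fun r => r.set x.toNat v) h1
  rw [← hrow] at hmod
  rw [pvS2]
  omega

-- ===== PORT A =====
-- body of A's `for k in range(4)` loop (state: isVisited × dist × pending queue)
def aStep (board : List (List String)) (W H : Int) (y x : Int)
    (st : List (List Bool) × List (List Int) × List (Int × Int)) (k : Nat) :
    List (List Bool) × List (List Int) × List (Int × Int) :=
  let ny := y + pvDy.getD k 0
  let nx := x + pvDx.getD k 0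
  if ny < 0 ∨ nx < 0 ∨ H ≤ ny ∨ W ≤ nx then st
  else if pvG2 st.1 ny nx true = true ∨ pvG2 board ny nx "" = "x" then st
  else (pvS2 st.1 ny nx true, pvS2 st.2.1 ny nx (pvG2 st.2.1 y x 0 + 1),
        st.2.2 ++ [(ny, nx)])

def aExpand (board : List (List String)) (W H : Int) (y x : Int)
    (st : List (List Bool) × List (List Int) × List (Int × Int)) :
    List (List Bool) × List (List Int) × List (Int × Int) :=
  (List.range 4).foldl (aStep board W H y x) st

-- each accepted neighbour marks one unvisited cell visited and enqueues it once
theorem aStep_meas (board : List (List String)) (W H : Int) (y x : Int)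
    (st : List (List Bool) × List (List Int) × List (Int × Int)) (k : Nat) :
    4 * pvCnt (fun b => !b) (aStep board W H y x st k).1 + (aStep board W H y x st k).2.2.length
      ≤ 4 * pvCnt (fun b => !b) st.1 + st.2.2.length := by
  unfold aStep
  dsimp only
  split_ifs with h1 h2
  · exact le_refl _
  · exact le_refl _
  · rw [not_or] at h2
    obtain ⟨hv, -⟩ := h2
    have hread : pvG2 st.1 (y + pvDy.getD k 0) (x + pvDx.getD k 0) true = false := by
      cases hb : pvG2 st.1 (y + pvDy.getD k 0) (x + pvDx.getD k 0) true
      · rfl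
      · exact absurd hb hv
    have hc := pvCnt_pvS2 (fun b => !b) st.1 (y + pvDy.getD k 0) (x + pvDx.getD k 0) true true
      (by simp) (by rw [hread]; rfl) (by simp)
    dsimp only
    simp only [List.length_append, List.length_cons, List.length_nil]
    omega

theorem aFold_meas (board : List (List String)) (W H : Int) (y x : Int) :
    ∀ (ks : List Nat) (st : List (List Bool) × List (List Int) × List (Int × Int)),
      4 * pvCnt (fun b => !b) (ks.foldl (aStep board W H y x) st).1
          + (ks.foldl (aStep board W H y x) st).2.2.length
        ≤ 4 * pvCnt (fun b => !b) st.1 + st.2.2.length := by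
  intro ks
  induction ks with
  | nil => intro st; exact le_refl _
  | cons k ks ih =>
    intro st
    simp only [List.foldl_cons]
    exact le_trans (ih (aStep board W H y x st k)) (aStep_meas board W H y x st k)

theorem aExpand_meas (board : List (List String)) (W H : Int) (y x : Int)
    (st : List (List Bool) × List (List Int) × List (Int × Int)) :
    4 * pvCnt (fun b => !b) (aExpand board W H y x st).1 + (aExpand board W H y x st).2.2.length
      ≤ 4 * pvCnt (fun b => !b) st.1 + st.2.2.length :=
  aFold_meas board W H y x (List.range 4) st

-- A's `while dq:` loop
def aBFS (board : List (List String)) (W H : Int) (vis : List (List Bool))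
    (dist : List (List Int)) (q : List (Int × Int)) : List (List Int) :=
  match q with
  | [] => dist
  | (y, x) :: q' =>
      let st := aExpand board W H y x (vis, dist, q')
      aBFS board W H st.1 st.2.1 st.2.2
termination_by 4 * pvCnt (fun b => !b) vis + q.length
decreasing_by
  have h := aExpand_meas board W H y x (vis, dist, q')
  simp only [List.length_cons] at *
  omega

def setDistanceBetweenDust (board : List (List String)) (dust : List (Int × Int))
    (L : Int) (W : Int) (H : Int) : List (List Int) × Bool :=
  let mat0 := List.replicate L.toNat (List.replicate L.toNat (0 : Int))
  let mat := (PySem.List.pyRange 0 L 1).foldl (fun m i =>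
      let s := PySem.List.pyGetD dust i (0, 0)      -- dust[i] (in range under Pre_)
      let vis0 := pvS2 (List.replicate H.toNat (List.replicate W.toNat false)) s.1 s.2 true
      let dist0 := pvS2 (List.replicate H.toNat (List.replicate W.toNat (-1 : Int))) s.1 s.2 (0 : Int)
      let dist := aBFS board W H vis0 dist0 [(s.1, s.2)]
      (PySem.List.pyRange 0 L 1).foldl (fun m j =>
          let t := PySem.List.pyGetD dust j (0, 0)  -- dust[j] (in range under Pre_)
          pvS2 m i j (pvG2 dist t.1 t.2 0)) m) mat0
  let flag := (PySem.List.pyRange 0 L 1).foldl (fun f i =>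
      if 1 ≤ PySem.List.count (PySem.List.pyGetD mat i []) (-1) then false else f) true
  (mat, flag)

-- ===== PORT B =====
-- the four neighbour positions B probes, in Source B's tuple order
def jNbrs (y x : Int) : List (Int × Int) :=
  [(y - 1, x), (y + 1, x), (y, x - 1), (y, x + 1)]

-- Source B's `neighbors_min`: smallest assigned neighbour value, -1 if none
def jMin (dist : List (List Int)) (W H : Int) (y x : Int) : Int :=
  (jNbrs y x).foldl (fun best p =>
    if 0 ≤ p.1 ∧ p.1 < H ∧ 0 ≤ p.2 ∧ p.2 < W ∧ pvG2 dist p.1 p.2 0 ≠ -1 then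
      if best = -1 ∨ pvG2 dist p.1 p.2 0 < best then pvG2 dist p.1 p.2 0 else best
    else best) (-1)

-- value of one cell after one sweep (body of Source B's inner x-loop)
def jCell (board : List (List String)) (dist : List (List Int)) (W H : Int) (y x : Int) : Int :=
  let v := pvG2 dist y x 0
  if v = -1 ∧ pvG2 board y x "" ≠ "x" then
    let m := jMin dist W H y x
    if 0 ≤ m then m + 1 else v
  else v

-- did Source B's sweep set `changed` at cell (y, x)?
def jChg (board : List (List String)) (dist : List (List Int)) (W H : Int) (y x : Int) : Bool :=
  decide (pvG2 dist y x 0 = -1 ∧ pvG2 board y x "" ≠ "x" ∧ 0 ≤ jMin dist W H y x)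

-- one whole-grid sweep (Source B's y/x loops building `new` and `changed`)
def jSweep (board : List (List String)) (W H : Int) (dist : List (List Int)) :
    List (List Int) × Bool :=
  ((List.range H.toNat).map (fun (y : Nat) =>
      (List.range W.toNat).map (fun (x : Nat) => jCell board dist W H (y : Int) (x : Int))),
   (List.range H.toNat).any (fun (y : Nat) =>
      (List.range W.toNat).any (fun (x : Nat) => jChg board dist W H (y : Int) (x : Int))))

-- ----- counting lemmas used only for jLoop's termination -----
theorem pvCountP_lt {α : Type} (p q : α → Bool) :
    ∀ l : List α, (∀ a ∈ l, p a = true → q a = true) →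
      (∃ a ∈ l, q a = true ∧ p a = false) → l.countP p < l.countP q := by
  intro l
  induction l with
  | nil => rintro _ ⟨a, ha, _⟩; simp at ha
  | cons a t ih =>
    rintro hmono ⟨b, hb, hqb, hpb⟩
    have hmt : ∀ x ∈ t, p x = true → q x = true :=
      fun x hx => hmono x (List.mem_cons_of_mem _ hx)
    simp only [List.countP_cons]
    rcases List.mem_cons.mp hb with rfl | hbt
    · have hle := List.countP_mono_left (l := t) (p := p) (q := q) hmt
      rw [hpb, hqb]
      simp only [Bool.false_eq_true, if_false, if_true]
      omega
    · have hlt := ih hmt ⟨b, hbt, hqb, hpb⟩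
      have hhead : (if p a = true then 1 else 0) ≤ (if q a = true then 1 else 0) := by
        by_cases hpa : p a = true
        · simp [hpa, hmono a List.mem_cons_self hpa]
        · simp [hpa]
      omega

theorem pvSum_le {α : Type} (f g : α → Nat) :
    ∀ l : List α, (∀ a ∈ l, f a ≤ g a) → (l.map f).sum ≤ (l.map g).sum := by
  intro l
  induction l with
  | nil => simp
  | cons a t ih =>
    intro h
    simp only [List.map_cons, List.sum_cons]
    have h1 := ih (fun x hx => h x (List.mem_cons_of_mem _ hx))
    have h2 := h a List.mem_cons_self
    omega

theorem pvSum_lt {α : Type} (f g : α → Nat) :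
    ∀ l : List α, (∀ a ∈ l, f a ≤ g a) → (∃ a ∈ l, f a < g a) →
      (l.map f).sum < (l.map g).sum := by
  intro l
  induction l with
  | nil => rintro _ ⟨a, ha, _⟩; simp at ha
  | cons a t ih =>
    rintro h ⟨b, hb, hfb⟩
    simp only [List.map_cons, List.sum_cons]
    have hle := pvSum_le f g t (fun x hx => h x (List.mem_cons_of_mem _ hx))
    rcases List.mem_cons.mp hb with rfl | hbt
    · omega
    · have hlt := ih (fun x hx => h x (List.mem_cons_of_mem _ hx)) ⟨b, hbt, hfb⟩
      have h2 := h a List.mem_cons_self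
      omega

theorem pvRangeCnt (r : List Int) (p : Int → Bool) (hp : p 0 = false) :
    ∀ n : Nat, (List.range n).countP (fun x => p (r.getD x 0)) = (r.take n).countP p := by
  intro n
  induction n with
  | zero => simp
  | succ m ih =>
    rw [List.range_succ, List.countP_append, ih]
    by_cases hm : m < r.length
    · have ht : r.take (m + 1) = r.take m ++ [r[m]] := by
        rw [List.take_succ, List.getElem?_eq_getElem hm]
        rfl
      have hd : r[m]?.getD 0 = r[m] := by rw [List.getElem?_eq_getElem hm]; rfl
      rw [ht, List.countP_append]
      simp [List.getD, hd]
    · have h1 : r.take (m + 1) = r := List.take_of_length_le (by omega)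
      have h1' : r.take m = r := List.take_of_length_le (by omega)
      have h2 : r[m]? = none := List.getElem?_eq_none (by omega)
      simp [List.getD, h1, h1', h2, hp]

theorem pvCountP_take_le {α : Type} (p : α → Bool) (r : List α) (n : Nat) :
    (r.take n).countP p ≤ r.countP p := by
  conv_rhs => rw [← List.take_append_drop n r]
  rw [List.countP_append]
  omega

theorem pvCnt_take_le {α : Type} (p : α → Bool) (g : List (List α)) (n : Nat) :
    pvCnt p (g.take n) ≤ pvCnt p g := by
  conv_rhs => rw [← List.take_append_drop n g]
  unfold pvCnt
  rw [List.map_append, List.sum_append]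
  omega

theorem pvGridRange (g : List (List Int)) (p : Int → Bool) :
    ∀ n : Nat, ((List.range n).map (fun y => (g.getD y []).countP p)).sum = pvCnt p (g.take n) := by
  intro n
  induction n with
  | zero => simp [pvCnt]
  | succ m ih =>
    rw [List.range_succ, List.map_append, List.sum_append, ih]
    by_cases hm : m < g.length
    · have ht : g.take (m + 1) = g.take m ++ [g[m]] := by
        rw [List.take_succ, List.getElem?_eq_getElem hm]
        rfl
      have hd : g[m]?.getD [] = g[m] := by rw [List.getElem?_eq_getElem hm]; rfl
      rw [ht]
      unfold pvCnt
      rw [List.map_append, List.sum_append]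
      simp [List.getD, hd]
    · have h1 : g.take (m + 1) = g := List.take_of_length_le (by omega)
      have h1' : g.take m = g := List.take_of_length_le (by omega)
      have h2 : g[m]? = none := List.getElem?_eq_none (by omega)
      simp [List.getD, h1, h1', h2]

-- a cell the sweep leaves at -1 was already -1
theorem pvJCell_neg (board : List (List String)) (dist : List (List Int)) (W H y x : Int)
    (h : jCell board dist W H y x = -1) : pvG2 dist y x 0 = -1 := by
  unfold jCell at h
  dsimp only at h
  split_ifs at h with h1 h2
  · omega
  · exact h
  · exact h

-- a cell that set `changed` flips from -1 to a non-(-1) value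
theorem pvJChg_new (board : List (List String)) (dist : List (List Int)) (W H y x : Int)
    (h : jChg board dist W H y x = true) :
    pvG2 dist y x 0 = -1 ∧ ¬ jCell board dist W H y x = -1 := by
  unfold jChg at h
  rw [decide_eq_true_iff] at h
  obtain ⟨h1, h2, h3⟩ := h
  refine ⟨h1, ?_⟩
  unfold jCell
  dsimp only
  rw [if_pos ⟨h1, h2⟩, if_pos h3]
  omega

-- a sweep that reports `changed` strictly decreases the number of -1 cells
theorem jSweep_lt (board : List (List String)) (W H : Int) (dist : List (List Int))
    (hc : (jSweep board W H dist).2 = true) :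
    pvCnt (fun v => decide (v = -1)) (jSweep board W H dist).1
      < pvCnt (fun v => decide (v = -1)) dist := by
  simp only [jSweep, List.any_eq_true, List.mem_range] at hc
  obtain ⟨y0, hy0, x0, hx0, hchg⟩ := hc
  have hL : pvCnt (fun v => decide (v = -1)) (jSweep board W H dist).1
      = ((List.range H.toNat).map (fun (y : Nat) =>
          (List.range W.toNat).countP (fun (x : Nat) =>
            decide (jCell board dist W H (y : Int) (x : Int) = -1)))).sum := by
    unfold jSweep pvCnt
    dsimp only
    rw [List.map_map]
    congr 1
    apply List.map_congr_left
    intro y _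
    simp only [Function.comp_apply]
    rw [List.countP_map]
    rfl
  rw [hL]
  have hstep1 : ((List.range H.toNat).map (fun (y : Nat) =>
          (List.range W.toNat).countP (fun (x : Nat) =>
            decide (jCell board dist W H (y : Int) (x : Int) = -1)))).sum
      < ((List.range H.toNat).map (fun (y : Nat) =>
          (List.range W.toNat).countP (fun (x : Nat) =>
            decide (pvG2 dist (y : Int) (x : Int) 0 = -1)))).sum := by
    apply pvSum_lt
    · intro y _
      apply List.countP_mono_left
      intro x _ hx
      rw [decide_eq_true_iff] at hx ⊢
      exact pvJCell_neg board dist W H _ _ hx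
    · refine ⟨y0, List.mem_range.mpr hy0, ?_⟩
      apply pvCountP_lt
      · intro x _ hx
        rw [decide_eq_true_iff] at hx ⊢
        exact pvJCell_neg board dist W H _ _ hx
      · obtain ⟨hold, hnew⟩ := pvJChg_new board dist W H _ _ hchg
        exact ⟨x0, List.mem_range.mpr hx0, by simpa using hold, by simpa using hnew⟩
  refine lt_of_lt_of_le hstep1 ?_
  have hrow : ∀ y : Nat,
      (List.range W.toNat).countP (fun (x : Nat) => decide (pvG2 dist (y : Int) (x : Int) 0 = -1))
        ≤ (dist.getD y []).countP (fun v => decide (v = -1)) := by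
    intro y
    have heq : (fun (x : Nat) => decide (pvG2 dist (y : Int) (x : Int) 0 = -1))
        = fun (x : Nat) => decide ((dist.getD y []).getD x 0 = -1) := by
      funext x
      simp [pvG2]
    rw [heq, pvRangeCnt (dist.getD y []) (fun v => decide (v = -1)) (by decide) W.toNat]
    exact pvCountP_take_le _ _ _
  refine le_trans (pvSum_le _ _ _ (fun y _ => hrow y)) ?_
  rw [pvGridRange]
  exact pvCnt_take_le _ _ _

-- B's `while changed:` loop (dist is replaced by the freshly built grid each sweep)
def jLoop (board : List (List String)) (W H : Int) (dist : List (List Int)) :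
    List (List Int) :=
  let s := jSweep board W H dist
  if h : s.2 = true then jLoop board W H s.1 else s.1
termination_by pvCnt (fun v => decide (v = -1)) dist
decreasing_by exact jSweep_lt board W H dist h

def setDistanceBetweenDust_alt (board : List (List String)) (dust : List (Int × Int))
    (L : Int) (W : Int) (H : Int) : List (List Int) × Bool :=
  let rows := (PySem.List.pyRange 0 L 1).foldl (fun rows i =>
      let s := PySem.List.pyGetD dust i (0, 0)      -- dust[i] (in range under Pre_)
      let dist0 := pvS2 (List.replicate H.toNat (List.replicate W.toNat (-1 : Int))) s.1 s.2 (0 : Int)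
      let dist := jLoop board W H dist0
      rows ++ [(PySem.List.slice dust none (some L)).map (fun t => pvG2 dist t.1 t.2 0)])
    ([] : List (List Int))
  let flag := rows.all (fun r => !(r.contains (-1)))
  (rows, flag)

-- ===== PRECONDITION & SPEC =====
-- Pre_ excludes inputs where A raises IndexError (L > len(dust); a dust coordinate ≥ H or ≥ W;
-- a board not covering the H×W grid whose missing cells the BFS reaches) and, narrower than the
-- raising inputs alone, inputs where A only returns through Python's accidental negative-index
-- wraparound (negative dust coordinates) or because missing board cells happen to be unreachable
-- (B's whole-grid sweeps read every board cell, so B needs the full H×W board; the board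
-- conditions are only required when 0 < L, i.e. when the board is touched at all).
def Pre_setDistanceBetweenDust (board : List (List String)) (dust : List (Int × Int))
    (L : Int) (W : Int) (H : Int) : Prop :=
  L ≤ (dust.length : Int)
  ∧ (∀ p ∈ dust.take L.toNat, 0 ≤ p.1 ∧ p.1 < H ∧ 0 ≤ p.2 ∧ p.2 < W)
  ∧ (0 < L → H ≤ (board.length : Int) ∧ ∀ r ∈ board.take H.toNat, W ≤ (r.length : Int))
instance (board : List (List String)) (dust : List (Int × Int)) (L : Int) (W : Int) (H : Int) :
    Decidable (Pre_setDistanceBetweenDust board dust L W H) := by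
  unfold Pre_setDistanceBetweenDust; infer_instance

def pvWitness_setDistanceBetweenDust : List (List String) × (List (Int × Int)) × Int × Int × Int :=
  ([[".", "."], [".", "x"]], ([(0, 0), (1, 0)], (2, (2, 2))))

def Spec_setDistanceBetweenDust (board : List (List String)) (dust : List (Int × Int)) (L : Int) (W : Int) (H : Int) (out : List (List Int) × Bool) : Prop := out = setDistanceBetweenDust_alt board dust L W H
instance (board : List (List String)) (dust : List (Int × Int)) (L : Int) (W : Int) (H : Int) (out : List (List Int) × Bool) : Decidable (Spec_setDistanceBetweenDust board dust L W H out) := by unfold Spec_setDistanceBetweenDust; infer_instance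

-- ===== CLAIM (what is proved, stated in full; the proofs are below) =====
def Claim_equal_setDistanceBetweenDust : Prop := ∀ (board : List (List String)) (dust : List (Int × Int)) (L : Int) (W : Int) (H : Int), Dom_setDistanceBetweenDust board dust L W H → Pre_setDistanceBetweenDust board dust L W H → Spec_setDistanceBetweenDust board dust L W H (setDistanceBetweenDust board dust L W H)

-- ===== LEMMAS AND PROOFS =====

-- reading after a pvS2 write at a valid position
theorem pvGetD2_modify_set {α : Type} (g : List (List α)) (i j m n : Nat) (v d : α)
    (hi : i < g.length) (hj : j < (g[i]'hi).length) :
    ((g.modify i (fun r => r.set j v)).getD m []).getD n d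
      = if m = i ∧ n = j then v else (g.getD m []).getD n d := by
  have hgd : ∀ (l : List (List α)) (k : Nat), l.getD k [] = l[k]?.getD [] := fun _ _ => rfl
  by_cases hm : m = i
  · subst hm
    have hrow : (g.modify m (fun r => r.set j v)).getD m [] = (g[m]'hi).set j v := by
      rw [hgd, List.getElem?_modify, List.getElem?_eq_getElem hi]
      simp
    rw [hrow]
    by_cases hn : n = j
    · subst hn
      rw [if_pos ⟨rfl, rfl⟩]
      have hlt : n < ((g[m]'hi).set n v).length := by simpa using hj
      rw [List.getD_eq_getElem _ _ hlt]
      exact List.getElem_set_self _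
    · rw [if_neg (by tauto)]
      unfold List.getD
      rw [List.getElem?_set_ne (by omega), List.getElem?_eq_getElem hi]
      rfl
  · rw [if_neg (by tauto)]
    rw [hgd, hgd, List.getElem?_modify]
    cases g[m]? with
    | none => rfl
    | some r =>
      show (if i = m then r.set j v else r)[n]?.getD d = r[n]?.getD d
      rw [if_neg (Ne.symm hm)]

theorem pvG2_pvS2 {α : Type} (g : List (List α)) (a b y x : Int) (v d : α)
    (ha : a.toNat < g.length) (hb : b.toNat < (g.getD a.toNat []).length) :
    pvG2 (pvS2 g a b v) y x d
      = if y.toNat = a.toNat ∧ x.toNat = b.toNat then v else pvG2 g y x d := by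
  have hb' : b.toNat < (g[a.toNat]'ha).length := by
    rwa [List.getD_eq_getElem _ _ ha] at hb
  unfold pvG2 pvS2
  exact pvGetD2_modify_set g a.toNat b.toNat y.toNat x.toNat v d ha hb'

-- ---------- proof-only notions: grid shape, visited/dist relation, in-range cells ----------
def pvShape {α : Type} (H W : Int) (g : List (List α)) : Prop :=
  g.length = H.toNat ∧ ∀ r ∈ g, r.length = W.toNat

def pvIn (H W : Int) (c : Int × Int) : Prop :=
  0 ≤ c.1 ∧ c.1 < H ∧ 0 ≤ c.2 ∧ c.2 < W

def pvRel (H W : Int) (vis : List (List Bool)) (dist : List (List Int)) : Prop :=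
  ∀ y x : Int, 0 ≤ y → y < H → 0 ≤ x → x < W →
    (pvG2 vis y x true = true ↔ pvG2 dist y x 0 ≠ -1)

theorem pvShape_valid {α : Type} {H W : Int} {g : List (List α)} (h : pvShape H W g)
    {y x : Int} (hy0 : 0 ≤ y) (hyH : y < H) (hx0 : 0 ≤ x) (hxW : x < W) :
    y.toNat < g.length ∧ x.toNat < (g.getD y.toNat []).length := by
  have h1 : y.toNat < g.length := by rw [h.1]; omega
  refine ⟨h1, ?_⟩
  rw [List.getD_eq_getElem _ _ h1, h.2 _ (List.getElem_mem h1)]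
  omega

theorem pvShape_pvS2 {α : Type} {H W : Int} {g : List (List α)} (h : pvShape H W g)
    (y x : Int) (v : α) : pvShape H W (pvS2 g y x v) := by
  refine ⟨by rw [pvS2, List.length_modify, h.1], ?_⟩
  intro r hr
  rw [pvS2] at hr
  obtain ⟨j, hj, rfl⟩ := List.mem_iff_getElem.mp hr
  rw [List.getElem_modify]
  split
  · rw [List.length_set]; exact h.2 _ (List.getElem_mem _)
  · exact h.2 _ (List.getElem_mem _)

-- ---------- proof-only intermediate: the level-synchronous BFS ----------
def bStep (board : List (List String)) (W H : Int) (level : Nat) (y x : Int)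
    (st : List (List Int) × List (Int × Int)) (k : Nat) :
    List (List Int) × List (Int × Int) :=
  let ny := y + pvDy.getD k 0
  let nx := x + pvDx.getD k 0
  if 0 ≤ ny ∧ ny < H ∧ 0 ≤ nx ∧ nx < W ∧ pvG2 st.1 ny nx 0 = -1 ∧ pvG2 board ny nx "" ≠ "x"
  then (pvS2 st.1 ny nx ((level : Int) + 1), st.2 ++ [(ny, nx)])
  else st

def bExpand (board : List (List String)) (W H : Int) (level : Nat)
    (st : List (List Int) × List (Int × Int)) (c : Int × Int) :
    List (List Int) × List (Int × Int) :=
  (List.range 4).foldl (bStep board W H level c.1 c.2) st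

-- one wave flips exactly (next frontier growth) many cells away from -1
theorem bStep_meas (board : List (List String)) (W H : Int) (level : Nat) (y x : Int)
    (st : List (List Int) × List (Int × Int)) (k : Nat) :
    pvCnt (fun v => decide (v = -1)) (bStep board W H level y x st k).1
        + (bStep board W H level y x st k).2.length
      = pvCnt (fun v => decide (v = -1)) st.1 + st.2.length := by
  unfold bStep
  dsimp only
  split_ifs with h1
  · obtain ⟨-, -, -, -, hread, -⟩ := h1
    have hc := pvCnt_pvS2 (fun v => decide (v = -1)) st.1 (y + pvDy.getD k 0) (x + pvDx.getD k 0)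
      ((level : Int) + 1) 0 (by decide) (by rw [hread]; decide)
      (by simp only [decide_eq_false_iff_not]; omega)
    dsimp only
    simp only [List.length_append, List.length_cons, List.length_nil]
    omega
  · rfl

theorem bCellFold_meas (board : List (List String)) (W H : Int) (level : Nat) (y x : Int) :
    ∀ (ks : List Nat) (st : List (List Int) × List (Int × Int)),
      pvCnt (fun v => decide (v = -1)) (ks.foldl (bStep board W H level y x) st).1
          + (ks.foldl (bStep board W H level y x) st).2.length
        = pvCnt (fun v => decide (v = -1)) st.1 + st.2.length := by
  intro ks
  induction ks with
  | nil => intro st; rfl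
  | cons k ks ih =>
    intro st
    simp only [List.foldl_cons]
    rw [ih (bStep board W H level y x st k), bStep_meas board W H level y x st k]

theorem bFold_meas (board : List (List String)) (W H : Int) (level : Nat)
    (frontier : List (Int × Int)) (st : List (List Int) × List (Int × Int)) :
    pvCnt (fun v => decide (v = -1)) (frontier.foldl (bExpand board W H level) st).1
        + (frontier.foldl (bExpand board W H level) st).2.length
      = pvCnt (fun v => decide (v = -1)) st.1 + st.2.length := by
  induction frontier generalizing st with
  | nil => rfl
  | cons c cs ih =>
    simp only [List.foldl_cons]
    rw [ih (bExpand board W H level st c)]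
    exact bCellFold_meas board W H level c.1 c.2 (List.range 4) st

-- the level-by-level loop (proof-only bridge between A's deque BFS and B's sweeps)
def bLevels (board : List (List String)) (W H : Int) (dist : List (List Int))
    (frontier : List (Int × Int)) (level : Nat) : List (List Int) :=
  if frontier = [] then dist
  else
    let st := frontier.foldl (bExpand board W H level) (dist, [])
    bLevels board W H st.1 st.2 (level + 1)
termination_by 2 * pvCnt (fun v => decide (v = -1)) dist + (if frontier = [] then 0 else 1)
decreasing_by
  rename_i hf
  have h := bFold_meas board W H level frontier (dist, [])
  by_cases hn : (frontier.foldl (bExpand board W H level) (dist, [])).2 = [] <;>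
    simp only [hn, hf, List.length_nil, List.length_cons, ite_false] at h ⊢ <;>
    rcases hx : (frontier.foldl (bExpand board W H level) (dist, [])).2 with _ | ⟨c, cs⟩ <;>
    simp_all <;> omega

-- ---------- one neighbour probe: A's step and the level step do the same thing ----------
theorem pvStepSim (board : List (List String)) (W H : Int) (ℓ : Nat) (y x : Int) (k : Nat)
    (vis : List (List Bool)) (dist : List (List Int)) (q acc : List (Int × Int))
    (hsv : pvShape H W vis) (hsd : pvShape H W dist) (hrel : pvRel H W vis dist)
    (hyd : pvG2 dist y x 0 = (ℓ : Int)) :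
    ∃ vis' dist' Δ,
      aStep board W H y x (vis, dist, q) k = (vis', dist', q ++ Δ)
      ∧ bStep board W H ℓ y x (dist, acc) k = (dist', acc ++ Δ)
      ∧ pvShape H W vis' ∧ pvShape H W dist' ∧ pvRel H W vis' dist'
      ∧ (∀ c : Int × Int, pvIn H W c → pvG2 dist c.1 c.2 0 ≠ -1 →
            pvG2 dist' c.1 c.2 0 = pvG2 dist c.1 c.2 0)
      ∧ (∀ c ∈ Δ, pvIn H W c ∧ pvG2 dist' c.1 c.2 0 = (ℓ : Int) + 1) := by
  unfold aStep bStep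
  dsimp only
  set ny := y + pvDy.getD k 0 with hny
  set nx := x + pvDx.getD k 0 with hnx
  by_cases hb : ny < 0 ∨ nx < 0 ∨ H ≤ ny ∨ W ≤ nx
  · rw [if_pos hb, if_neg (fun hc => by obtain ⟨h1, h2, h3, h4, -, -⟩ := hc; omega)]
    exact ⟨vis, dist, [], by simp, by simp, hsv, hsd, hrel, fun c _ _ => rfl, by simp⟩
  · rw [not_or, not_or, not_or] at hb
    obtain ⟨hb1, hb2, hb3, hb4⟩ := hb
    rw [if_neg (by omega)]
    by_cases hvis : pvG2 vis ny nx true = true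
    · have hne : pvG2 dist ny nx 0 ≠ -1 :=
        (hrel ny nx (by omega) (by omega) (by omega) (by omega)).mp hvis
      rw [if_pos (Or.inl hvis), if_neg (fun hc => hne hc.2.2.2.2.1)]
      exact ⟨vis, dist, [], by simp, by simp, hsv, hsd, hrel, fun c _ _ => rfl, by simp⟩
    · by_cases hbx : pvG2 board ny nx "" = "x"
      · rw [if_pos (Or.inr hbx), if_neg (fun hc => hc.2.2.2.2.2 hbx)]
        exact ⟨vis, dist, [], by simp, by simp, hsv, hsd, hrel, fun c _ _ => rfl, by simp⟩
      · have hm1 : pvG2 dist ny nx 0 = -1 := by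
          by_contra hne
          exact hvis ((hrel ny nx (by omega) (by omega) (by omega) (by omega)).mpr hne)
        rw [if_neg (fun hc => hc.elim hvis hbx),
            if_pos ⟨by omega, by omega, by omega, by omega, hm1, hbx⟩, hyd]
        obtain ⟨hvy, hvx⟩ := pvShape_valid hsv (by omega : (0:Int) ≤ ny) (by omega) (by omega : (0:Int) ≤ nx) (by omega)
        obtain ⟨hdy, hdx⟩ := pvShape_valid hsd (by omega : (0:Int) ≤ ny) (by omega) (by omega : (0:Int) ≤ nx) (by omega)
        refine ⟨pvS2 vis ny nx true, pvS2 dist ny nx ((ℓ : Int) + 1), [(ny, nx)],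
          rfl, rfl, pvShape_pvS2 hsv _ _ _, pvShape_pvS2 hsd _ _ _, ?_, ?_, ?_⟩
        · intro u v hu0 huH hv0 hvW
          rw [pvG2_pvS2 vis ny nx u v true true hvy hvx,
              pvG2_pvS2 dist ny nx u v ((ℓ : Int) + 1) 0 hdy hdx]
          split
          · constructor
            · intro _; omega
            · intro _; rfl
          · exact hrel u v hu0 huH hv0 hvW
        · intro c hc hcne
          rw [pvG2_pvS2 dist ny nx c.1 c.2 ((ℓ : Int) + 1) 0 hdy hdx]
          split
          · rename_i hceq
            obtain ⟨hc1, hc2, hc3, hc4⟩ := hc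
            have h1 : c.1 = ny := by omega
            have h2 : c.2 = nx := by omega
            rw [h1, h2] at hcne
            exact absurd hm1 hcne
          · rfl
        · intro c hc
          rw [List.mem_singleton] at hc
          subst hc
          refine ⟨⟨by omega, by omega, by omega, by omega⟩, ?_⟩
          rw [pvG2_pvS2 dist ny nx ny nx ((ℓ : Int) + 1) 0 hdy hdx, if_pos ⟨rfl, rfl⟩]

-- ---------- all four probes of one cell ----------
theorem pvCellFoldSim (board : List (List String)) (W H : Int) (ℓ : Nat) (y x : Int)
    (hin : pvIn H W (y, x)) :
    ∀ (ks : List Nat) (vis : List (List Bool)) (dist : List (List Int)) (q acc : List (Int × Int)),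
      pvShape H W vis → pvShape H W dist → pvRel H W vis dist →
      pvG2 dist y x 0 = (ℓ : Int) →
      ∃ vis' dist' Δ,
        ks.foldl (aStep board W H y x) (vis, dist, q) = (vis', dist', q ++ Δ)
        ∧ ks.foldl (bStep board W H ℓ y x) (dist, acc) = (dist', acc ++ Δ)
        ∧ pvShape H W vis' ∧ pvShape H W dist' ∧ pvRel H W vis' dist'
        ∧ (∀ c : Int × Int, pvIn H W c → pvG2 dist c.1 c.2 0 ≠ -1 →
              pvG2 dist' c.1 c.2 0 = pvG2 dist c.1 c.2 0)
        ∧ (∀ c ∈ Δ, pvIn H W c ∧ pvG2 dist' c.1 c.2 0 = (ℓ : Int) + 1) := by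
  intro ks
  induction ks with
  | nil =>
    intro vis dist q acc hsv hsd hrel hyd
    exact ⟨vis, dist, [], by simp, by simp, hsv, hsd, hrel, fun c _ _ => rfl, by simp⟩
  | cons k ks ih =>
    intro vis dist q acc hsv hsd hrel hyd
    obtain ⟨vis1, dist1, Δ1, ha1, hb1, hsv1, hsd1, hrel1, hp1, hΔ1⟩ :=
      pvStepSim board W H ℓ y x k vis dist q acc hsv hsd hrel hyd
    have hyd1 : pvG2 dist1 y x 0 = (ℓ : Int) := by
      rw [hp1 (y, x) hin (by rw [hyd]; omega)]; exact hyd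
    obtain ⟨vis', dist', Δ2, ha2, hb2, hsv', hsd', hrel', hp2, hΔ2⟩ :=
      ih vis1 dist1 (q ++ Δ1) (acc ++ Δ1) hsv1 hsd1 hrel1 hyd1
    refine ⟨vis', dist', Δ1 ++ Δ2, ?_, ?_, hsv', hsd', hrel', ?_, ?_⟩
    · rw [List.foldl_cons, ha1, ha2, List.append_assoc]
    · rw [List.foldl_cons, hb1, hb2, List.append_assoc]
    · intro c hc hcne
      rw [hp2 c hc (by rw [hp1 c hc hcne]; exact hcne), hp1 c hc hcne]
    · intro c hc
      rcases List.mem_append.mp hc with h1 | h2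
      · obtain ⟨hcin, hcv⟩ := hΔ1 c h1
        exact ⟨hcin, by rw [hp2 c hcin (by rw [hcv]; omega)]; exact hcv⟩
      · exact hΔ2 c h2

-- ---------- the expansion of one popped cell / one frontier cell agree ----------
theorem pvExpandSim (board : List (List String)) (W H : Int) (ℓ : Nat) (c : Int × Int)
    (hin : pvIn H W c)
    (vis : List (List Bool)) (dist : List (List Int)) (q acc : List (Int × Int))
    (hsv : pvShape H W vis) (hsd : pvShape H W dist) (hrel : pvRel H W vis dist)
    (hyd : pvG2 dist c.1 c.2 0 = (ℓ : Int)) :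
    ∃ vis' dist' Δ,
      aExpand board W H c.1 c.2 (vis, dist, q) = (vis', dist', q ++ Δ)
      ∧ bExpand board W H ℓ (dist, acc) c = (dist', acc ++ Δ)
      ∧ pvShape H W vis' ∧ pvShape H W dist' ∧ pvRel H W vis' dist'
      ∧ (∀ c' : Int × Int, pvIn H W c' → pvG2 dist c'.1 c'.2 0 ≠ -1 →
            pvG2 dist' c'.1 c'.2 0 = pvG2 dist c'.1 c'.2 0)
      ∧ (∀ c' ∈ Δ, pvIn H W c' ∧ pvG2 dist' c'.1 c'.2 0 = (ℓ : Int) + 1) := by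
  have h := pvCellFoldSim board W H ℓ c.1 c.2 (by simpa using hin) (List.range 4)
    vis dist q acc hsv hsd hrel hyd
  simpa [aExpand, bExpand] using h

-- ---------- A's whole while-loop tracked against the level loop ----------
theorem pvSimAux (board : List (List String)) (W H : Int) :
    ∀ (N : Nat) (vis : List (List Bool)) (dist : List (List Int))
      (f n : List (Int × Int)) (ℓ : Nat),
      2 * (4 * pvCnt (fun b => !b) vis + (f ++ n).length) + (if f = [] then 1 else 0) ≤ N →
      pvShape H W vis → pvShape H W dist → pvRel H W vis dist →
      (∀ c ∈ f, pvIn H W c ∧ pvG2 dist c.1 c.2 0 = (ℓ : Int)) →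
      (∀ c ∈ n, pvIn H W c ∧ pvG2 dist c.1 c.2 0 = (ℓ : Int) + 1) →
      aBFS board W H vis dist (f ++ n)
        = bLevels board W H (f.foldl (bExpand board W H ℓ) (dist, n)).1
            (f.foldl (bExpand board W H ℓ) (dist, n)).2 (ℓ + 1) := by
  intro N
  induction N with
  | zero =>
    intro vis dist f n ℓ hN
    exfalso
    rcases f with _ | ⟨c, f'⟩ <;> simp at hN
  | succ N ih =>
    intro vis dist f n ℓ hN hsv hsd hrel hf hn
    rcases hfe : f with _ | ⟨c, f'⟩
    · -- current level exhausted
      simp only [List.foldl_nil, List.nil_append]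
      rcases hne : n with _ | ⟨c, n'⟩
      · rw [aBFS, bLevels]; simp
      · rw [bLevels, if_neg (by simp)]
        have hn' : ∀ c' ∈ n, pvIn H W c' ∧ pvG2 dist c'.1 c'.2 0 = ((ℓ + 1 : Nat) : Int) := by
          intro c' hc'
          obtain ⟨h1, h2⟩ := hn c' hc'
          exact ⟨h1, by rw [h2]; push_cast; ring⟩
        have := ih vis dist n [] (ℓ + 1)
          (by subst hfe; rw [hne] at hN ⊢; simp at hN ⊢; omega)
          hsv hsd hrel (hne ▸ hn') (by simp)
        rw [List.append_nil] at this
        rw [← hne, this]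
    · -- pop c, expand, recurse
      obtain ⟨hcin, hcd⟩ := hf c (by rw [hfe]; exact List.mem_cons_self)
      obtain ⟨vis1, dist1, Δ, ha1, hb1, hsv1, hsd1, hrel1, hp1, hΔ1⟩ :=
        pvExpandSim board W H ℓ c hcin vis dist (f' ++ n) n hsv hsd hrel hcd
      have hmeas := aExpand_meas board W H c.1 c.2 (vis, dist, f' ++ n)
      rw [ha1] at hmeas
      have hstep : aBFS board W H vis dist ((c :: f') ++ n)
          = aBFS board W H vis1 dist1 (f' ++ (n ++ Δ)) := by
        obtain ⟨cy, cx⟩ := c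
        rw [List.cons_append, aBFS]
        rw [ha1, ← List.append_assoc]
      rw [hstep]
      have hf' : ∀ c' ∈ f', pvIn H W c' ∧ pvG2 dist1 c'.1 c'.2 0 = (ℓ : Int) := by
        intro c' hc'
        obtain ⟨h1, h2⟩ := hf c' (by rw [hfe]; exact List.mem_cons_of_mem _ hc')
        exact ⟨h1, by rw [hp1 c' h1 (by rw [h2]; omega)]; exact h2⟩
      have hnΔ : ∀ c' ∈ n ++ Δ, pvIn H W c' ∧ pvG2 dist1 c'.1 c'.2 0 = (ℓ : Int) + 1 := by
        intro c' hc'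
        rcases List.mem_append.mp hc' with h1 | h2
        · obtain ⟨h1', h2'⟩ := hn c' h1
          exact ⟨h1', by rw [hp1 c' h1' (by rw [h2']; omega)]; exact h2'⟩
        · exact hΔ1 c' h2
      have hNle : 2 * (4 * pvCnt (fun b => !b) vis1 + (f' ++ (n ++ Δ)).length)
          + (if f' = [] then 1 else 0) ≤ N := by
        rw [hfe] at hN
        simp only [List.length_append, List.length_cons] at hmeas hN ⊢
        split_ifs at hN ⊢ <;> omega
      have := ih vis1 dist1 f' (n ++ Δ) ℓ hNle hsv1 hsd1 hrel1 hf' hnΔ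
      rw [this]
      have hfold : (c :: f').foldl (bExpand board W H ℓ) (dist, n)
          = f'.foldl (bExpand board W H ℓ) (dist1, n ++ Δ) := by
        rw [List.foldl_cons, hb1]
      rw [hfold]

-- ---------- initial grids ----------
theorem pvShape_replicate {α : Type} (H W : Int) (v : α) :
    pvShape H W (List.replicate H.toNat (List.replicate W.toNat v)) := by
  refine ⟨by simp, ?_⟩
  intro r hr
  rw [List.eq_of_mem_replicate hr]
  simp

theorem pvRep_valid {α : Type} {H W : Int} {y x : Int} (v : α)
    (hy0 : 0 ≤ y) (hyH : y < H) (hx0 : 0 ≤ x) (hxW : x < W) :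
    y.toNat < (List.replicate H.toNat (List.replicate W.toNat v)).length
      ∧ x.toNat < ((List.replicate H.toNat (List.replicate W.toNat v)).getD y.toNat []).length := by
  have h1 : y.toNat < (List.replicate H.toNat (List.replicate W.toNat v)).length := by
    simp; omega
  refine ⟨h1, ?_⟩
  rw [List.getD_eq_getElem _ _ h1, List.getElem_replicate]
  simp; omega

theorem pvG2_replicate {α : Type} (H W : Int) (v d : α) (y x : Int)
    (hy0 : 0 ≤ y) (hyH : y < H) (hx0 : 0 ≤ x) (hxW : x < W) :
    pvG2 (List.replicate H.toNat (List.replicate W.toNat v)) y x d = v := by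
  obtain ⟨h1, h2⟩ := pvRep_valid v hy0 hyH hx0 hxW
  have hrow : (List.replicate H.toNat (List.replicate W.toNat v)).getD y.toNat []
      = List.replicate W.toNat v := by
    rw [List.getD_eq_getElem _ _ h1]; exact List.getElem_replicate h1
  rw [pvG2, hrow, List.getD_eq_getElem _ _ (by simp; omega), List.getElem_replicate]

-- ---------- one source: A's BFS and the level BFS produce the same dist grid ----------
theorem pvBFS_eq (board : List (List String)) (W H : Int) (s : Int × Int)
    (hs : pvIn H W s) :
    aBFS board W H
        (pvS2 (List.replicate H.toNat (List.replicate W.toNat false)) s.1 s.2 true)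
        (pvS2 (List.replicate H.toNat (List.replicate W.toNat (-1 : Int))) s.1 s.2 (0 : Int))
        [(s.1, s.2)]
      = bLevels board W H
          (pvS2 (List.replicate H.toNat (List.replicate W.toNat (-1 : Int))) s.1 s.2 (0 : Int))
          [(s.1, s.2)] 0 := by
  obtain ⟨h1, h2, h3, h4⟩ := hs
  set vis0 := pvS2 (List.replicate H.toNat (List.replicate W.toNat false)) s.1 s.2 true with hv0
  set dist0 := pvS2 (List.replicate H.toNat (List.replicate W.toNat (-1 : Int))) s.1 s.2 (0 : Int) with hd0
  have hsv : pvShape H W vis0 := pvShape_pvS2 (pvShape_replicate H W false) _ _ _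
  have hsd : pvShape H W dist0 := pvShape_pvS2 (pvShape_replicate H W (-1 : Int)) _ _ _
  obtain ⟨hvy, hvx⟩ := pvRep_valid (H := H) (W := W) false h1 h2 h3 h4
  obtain ⟨hdy, hdx⟩ := pvRep_valid (H := H) (W := W) (-1 : Int) h1 h2 h3 h4
  have hrel : pvRel H W vis0 dist0 := by
    intro u v hu0 huH hv0' hvW
    rw [hv0, hd0, pvG2_pvS2 _ s.1 s.2 u v true true hvy hvx,
        pvG2_pvS2 _ s.1 s.2 u v (0 : Int) 0 hdy hdx]
    split
    · constructor
      · intro _; omega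
      · intro _; rfl
    · rw [pvG2_replicate H W false true u v hu0 huH hv0' hvW,
          pvG2_replicate H W (-1 : Int) 0 u v hu0 huH hv0' hvW]
      simp
  have hstart : pvG2 dist0 s.1 s.2 0 = ((0 : Nat) : Int) := by
    rw [hd0, pvG2_pvS2 _ s.1 s.2 s.1 s.2 (0 : Int) 0 hdy hdx, if_pos ⟨rfl, rfl⟩]
    simp
  have hsim := pvSimAux board W H
      (2 * (4 * pvCnt (fun b => !b) vis0 + ([(s.1, s.2)] ++ ([] : List (Int × Int))).length) + 1)
      vis0 dist0 [(s.1, s.2)] [] 0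
      (by simp)
      hsv hsd hrel
      (by
        intro c hc
        rw [List.mem_singleton] at hc
        subst hc
        exact ⟨⟨h1, h2, h3, h4⟩, hstart⟩)
      (by simp)
  rw [List.append_nil] at hsim
  rw [hsim]
  conv_rhs => rw [bLevels]
  rw [if_neg (by simp)]

-- ---------- the Jacobi bridge: one wave of the level BFS = one sweep of B ----------
-- the cells a wave over frontier fs assigns: unassigned, non-wall, adjacent to fs
abbrev pvAsg (board : List (List String)) (W H : Int) (fs : List (Int × Int))
    (dist : List (List Int)) (c : Int × Int) : Prop :=
  pvIn H W c ∧ pvG2 dist c.1 c.2 0 = -1 ∧ pvG2 board c.1 c.2 "" ≠ "x" ∧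
    ∃ f ∈ fs, c ∈ jNbrs f.1 f.2

theorem pvNbr_symm (c n : Int × Int) : n ∈ jNbrs c.1 c.2 ↔ c ∈ jNbrs n.1 n.2 := by
  obtain ⟨a, b⟩ := c
  obtain ⟨u, v⟩ := n
  simp only [jNbrs, List.mem_cons, List.not_mem_nil, or_false, Prod.mk.injEq]
  omega

theorem pvAsg_cons (board : List (List String)) (W H : Int) (f : Int × Int)
    (fs : List (Int × Int)) (dist : List (List Int)) (c : Int × Int) :
    pvAsg board W H (f :: fs) dist c ↔
      pvAsg board W H [f] dist c ∨ pvAsg board W H fs dist c := by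
  unfold pvAsg
  simp only [List.mem_cons, List.not_mem_nil, or_false]
  constructor
  · rintro ⟨h1, h2, h3, g, hg | hg, h5⟩
    · exact Or.inl ⟨h1, h2, h3, g, hg, h5⟩
    · exact Or.inr ⟨h1, h2, h3, g, hg, h5⟩
  · rintro (⟨h1, h2, h3, g, hg, h5⟩ | ⟨h1, h2, h3, g, hg, h5⟩)
    · exact ⟨h1, h2, h3, g, Or.inl hg, h5⟩
    · exact ⟨h1, h2, h3, g, Or.inr hg, h5⟩

-- pvAsg only reads the grid at c itself
theorem pvAsg_congr (board : List (List String)) (W H : Int) (fs : List (Int × Int))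
    (d1 d2 : List (List Int)) (c : Int × Int)
    (hval : pvG2 d1 c.1 c.2 0 = pvG2 d2 c.1 c.2 0) :
    pvAsg board W H fs d1 c ↔ pvAsg board W H fs d2 c := by
  unfold pvAsg
  rw [hval]

-- the four step offsets of the A/level BFS enumerate exactly jNbrs
theorem pvPos_iff (y x : Int) (c : Int × Int) :
    (∃ k ∈ List.range 4, c = (y + pvDy.getD k 0, x + pvDx.getD k 0)) ↔ c ∈ jNbrs y x := by
  obtain ⟨a, b⟩ := c
  simp only [List.mem_range, jNbrs, List.mem_cons, List.not_mem_nil, or_false,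
    Prod.mk.injEq, pvDy, pvDx]
  constructor
  · rintro ⟨k, hk, h1, h2⟩
    interval_cases k <;> simp_all [List.getD] <;> omega
  · rintro (⟨h1, h2⟩ | ⟨h1, h2⟩ | ⟨h1, h2⟩ | ⟨h1, h2⟩)
    · exact ⟨0, by omega, by constructor <;> simp [List.getD] <;> omega⟩
    · exact ⟨2, by omega, by constructor <;> simp [List.getD] <;> omega⟩
    · exact ⟨3, by omega, by constructor <;> simp [List.getD] <;> omega⟩
    · exact ⟨1, by omega, by constructor <;> simp [List.getD] <;> omega⟩

-- what one bStep probe does, stated over the original grid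
theorem bStep_char (board : List (List String)) (W H : Int) (ℓ : Nat) (y x : Int)
    (dist : List (List Int)) (acc : List (Int × Int)) (k : Nat) (hs : pvShape H W dist) :
    pvShape H W (bStep board W H ℓ y x (dist, acc) k).1
    ∧ (∀ c : Int × Int, pvIn H W c →
        c = (y + pvDy.getD k 0, x + pvDx.getD k 0) → pvG2 dist c.1 c.2 0 = -1 →
        pvG2 board c.1 c.2 "" ≠ "x" →
        pvG2 (bStep board W H ℓ y x (dist, acc) k).1 c.1 c.2 0 = (ℓ : Int) + 1)
    ∧ (∀ c : Int × Int, pvIn H W c →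
        ¬ (c = (y + pvDy.getD k 0, x + pvDx.getD k 0) ∧ pvG2 dist c.1 c.2 0 = -1 ∧
            pvG2 board c.1 c.2 "" ≠ "x") →
        pvG2 (bStep board W H ℓ y x (dist, acc) k).1 c.1 c.2 0 = pvG2 dist c.1 c.2 0)
    ∧ (∀ c : Int × Int, c ∈ (bStep board W H ℓ y x (dist, acc) k).2 ↔
        c ∈ acc ∨ (c = (y + pvDy.getD k 0, x + pvDx.getD k 0) ∧ pvIn H W c ∧
          pvG2 dist c.1 c.2 0 = -1 ∧ pvG2 board c.1 c.2 "" ≠ "x")) := by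
  unfold bStep
  dsimp only
  generalize y + pvDy.getD k 0 = ny
  generalize x + pvDx.getD k 0 = nx
  by_cases hg : 0 ≤ ny ∧ ny < H ∧ 0 ≤ nx ∧ nx < W ∧ pvG2 dist ny nx 0 = -1
      ∧ pvG2 board ny nx "" ≠ "x"
  · rw [if_pos hg]
    obtain ⟨hg1, hg2, hg3, hg4, hg5, hg6⟩ := hg
    obtain ⟨hvy, hvx⟩ := pvShape_valid hs hg1 hg2 hg3 hg4
    refine ⟨pvShape_pvS2 hs _ _ _, ?_, ?_, ?_⟩
    · rintro c hc rfl h1 h2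
      rw [pvG2_pvS2 dist ny nx ny nx _ 0 hvy hvx, if_pos ⟨rfl, rfl⟩]
    · intro c hc hnc
      have hcne : c ≠ (ny, nx) := fun hcase => hnc ⟨hcase, by rw [hcase]; exact hg5,
        by rw [hcase]; exact hg6⟩
      rw [pvG2_pvS2 dist ny nx c.1 c.2 _ 0 hvy hvx, if_neg ?_]
      rintro ⟨ht1, ht2⟩
      apply hcne
      obtain ⟨hc1, hc2, hc3, hc4⟩ := hc
      have he1 : c.1 = ny := by omega
      have he2 : c.2 = nx := by omega
      exact Prod.ext_iff.mpr ⟨he1, he2⟩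
    · intro c
      simp only [List.mem_append, List.mem_singleton]
      constructor
      · rintro (h | rfl)
        · exact Or.inl h
        · exact Or.inr ⟨rfl, ⟨hg1, hg2, hg3, hg4⟩, hg5, hg6⟩
      · rintro (h | ⟨rfl, -, -, -⟩)
        · exact Or.inl h
        · exact Or.inr rfl
  · rw [if_neg hg]
    refine ⟨hs, ?_, fun c _ _ => rfl, ?_⟩
    · rintro c hc rfl h1 h2
      exact absurd ⟨hc.1, hc.2.1, hc.2.2.1, hc.2.2.2, h1, h2⟩ hg
    · intro c
      constructor
      · exact Or.inl
      · rintro (h | ⟨rfl, hin, h1, h2⟩)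
        · exact h
        · exact absurd ⟨hin.1, hin.2.1, hin.2.2.1, hin.2.2.2, h1, h2⟩ hg

-- folding all four probes of one frontier cell
theorem bKFold_char (board : List (List String)) (W H : Int) (ℓ : Nat) (y x : Int) :
    ∀ (ks : List Nat) (dist : List (List Int)) (acc : List (Int × Int)), pvShape H W dist →
      pvShape H W ((ks.foldl (bStep board W H ℓ y x) (dist, acc)).1)
      ∧ (∀ c : Int × Int, pvIn H W c →
          pvG2 dist c.1 c.2 0 = -1 → pvG2 board c.1 c.2 "" ≠ "x" →
          (∃ k ∈ ks, c = (y + pvDy.getD k 0, x + pvDx.getD k 0)) →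
          pvG2 ((ks.foldl (bStep board W H ℓ y x) (dist, acc)).1) c.1 c.2 0 = (ℓ : Int) + 1)
      ∧ (∀ c : Int × Int, pvIn H W c →
          ¬ (pvG2 dist c.1 c.2 0 = -1 ∧ pvG2 board c.1 c.2 "" ≠ "x" ∧
              ∃ k ∈ ks, c = (y + pvDy.getD k 0, x + pvDx.getD k 0)) →
          pvG2 ((ks.foldl (bStep board W H ℓ y x) (dist, acc)).1) c.1 c.2 0
            = pvG2 dist c.1 c.2 0)
      ∧ (∀ c : Int × Int, c ∈ (ks.foldl (bStep board W H ℓ y x) (dist, acc)).2 ↔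
          c ∈ acc ∨ (pvIn H W c ∧ pvG2 dist c.1 c.2 0 = -1 ∧ pvG2 board c.1 c.2 "" ≠ "x" ∧
            ∃ k ∈ ks, c = (y + pvDy.getD k 0, x + pvDx.getD k 0))) := by
  intro ks
  induction ks with
  | nil =>
    intro dist acc hs
    refine ⟨hs, ?_, fun c _ _ => rfl, ?_⟩
    · rintro c _ _ _ ⟨k, hk, -⟩
      simp at hk
    · intro c
      simp
  | cons k ks ih =>
    intro dist acc hs
    simp only [List.foldl_cons]
    obtain ⟨hS1, hB1, hC1, hD1⟩ := bStep_char board W H ℓ y x dist acc k hs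
    obtain ⟨hS, hB, hC, hD⟩ := ih (bStep board W H ℓ y x (dist, acc) k).1
      (bStep board W H ℓ y x (dist, acc) k).2 hS1
    rw [Prod.mk.eta] at hS hB hC hD
    refine ⟨hS, ?_, ?_, ?_⟩
    · -- assigned case
      rintro c hc h1 h2 ⟨k', hk', hck'⟩
      by_cases hk0 : c = (y + pvDy.getD k 0, x + pvDx.getD k 0)
      · have hv1 := hB1 c hc hk0 h1 h2
        have := hC c hc (fun hcon => by rw [hv1] at hcon; omega)
        rw [this, hv1]
      · have hk'' : k' ∈ ks := by
          rcases List.mem_cons.mp hk' with rfl | h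
          · exact absurd hck' hk0
          · exact h
        have hv1 := hC1 c hc (fun hcon => hk0 hcon.1)
        have := hB c hc (by rw [hv1]; exact h1) h2 ⟨k', hk'', hck'⟩
        exact this
    · -- unchanged case
      intro c hc hnc
      have hv1 := hC1 c hc (fun hcon =>
        hnc ⟨hcon.2.1, hcon.2.2, k, List.mem_cons_self, hcon.1⟩)
      have := hC c hc (fun hcon => by
        rw [hv1] at hcon
        exact hnc ⟨hcon.1, hcon.2.1, by
          obtain ⟨k', hk', hck'⟩ := hcon.2.2
          exact ⟨k', List.mem_cons_of_mem _ hk', hck'⟩⟩)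
      rw [this, hv1]
    · -- membership
      intro c
      rw [hD c, hD1 c]
      constructor
      · rintro ((h | ⟨hck, hin, h1, h2⟩) | ⟨hin, h1', h2, hks⟩)
        · exact Or.inl h
        · exact Or.inr ⟨hin, h1, h2, k, List.mem_cons_self, hck⟩
        · -- value in the intermediate grid is -1 ⇒ it was -1 originally
          have h1 : pvG2 dist c.1 c.2 0 = -1 := by
            by_cases hcon : c = (y + pvDy.getD k 0, x + pvDx.getD k 0) ∧
                pvG2 dist c.1 c.2 0 = -1 ∧ pvG2 board c.1 c.2 "" ≠ "x"
            · have := hB1 c hin hcon.1 hcon.2.1 hcon.2.2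
              rw [this] at h1'
              omega
            · have := hC1 c hin hcon
              rw [this] at h1'
              exact h1'
          obtain ⟨k', hk', hck'⟩ := hks
          exact Or.inr ⟨hin, h1, h2, k', List.mem_cons_of_mem _ hk', hck'⟩
      · rintro (h | ⟨hin, h1, h2, k', hk', hck'⟩)
        · exact Or.inl (Or.inl h)
        · rcases List.mem_cons.mp hk' with rfl | hk''
          · exact Or.inl (Or.inr ⟨hck', hin, h1, h2⟩)
          · by_cases hk0 : c = (y + pvDy.getD k 0, x + pvDx.getD k 0)
            · exact Or.inl (Or.inr ⟨hk0, hin, h1, h2⟩)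
            · have hv1 := hC1 c hin (fun hcon => hk0 hcon.1)
              exact Or.inr ⟨hin, by rw [hv1]; exact h1, h2, k', hk'', hck'⟩

-- one bExpand over one frontier cell, phrased with pvAsg
theorem bExpand_char (board : List (List String)) (W H : Int) (ℓ : Nat) (f : Int × Int)
    (dist : List (List Int)) (acc : List (Int × Int)) (hs : pvShape H W dist) :
    pvShape H W ((bExpand board W H ℓ (dist, acc) f).1)
    ∧ (∀ c : Int × Int, pvAsg board W H [f] dist c →
        pvG2 ((bExpand board W H ℓ (dist, acc) f).1) c.1 c.2 0 = (ℓ : Int) + 1)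
    ∧ (∀ c : Int × Int, pvIn H W c → ¬ pvAsg board W H [f] dist c →
        pvG2 ((bExpand board W H ℓ (dist, acc) f).1) c.1 c.2 0 = pvG2 dist c.1 c.2 0)
    ∧ (∀ c : Int × Int, c ∈ (bExpand board W H ℓ (dist, acc) f).2 ↔
        c ∈ acc ∨ pvAsg board W H [f] dist c) := by
  obtain ⟨hS, hB, hC, hD⟩ := bKFold_char board W H ℓ f.1 f.2 (List.range 4) dist acc hs
  have hnb : ∀ c : Int × Int,
      (∃ k ∈ List.range 4, c = (f.1 + pvDy.getD k 0, f.2 + pvDx.getD k 0))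
        ↔ c ∈ jNbrs f.1 f.2 := fun c => pvPos_iff f.1 f.2 c
  have hasg : ∀ c : Int × Int, pvAsg board W H [f] dist c ↔
      (pvIn H W c ∧ pvG2 dist c.1 c.2 0 = -1 ∧ pvG2 board c.1 c.2 "" ≠ "x" ∧
        ∃ k ∈ List.range 4, c = (f.1 + pvDy.getD k 0, f.2 + pvDx.getD k 0)) := by
    intro c
    unfold pvAsg
    rw [hnb c]
    simp
  unfold bExpand
  refine ⟨hS, ?_, ?_, ?_⟩
  · intro c hca
    rw [hasg c] at hca
    exact hB c hca.1 hca.2.1 hca.2.2.1 hca.2.2.2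
  · intro c hc hnc
    rw [hasg c] at hnc
    exact hC c hc (fun hcon => hnc ⟨hc, hcon.1, hcon.2.1, hcon.2.2⟩)
  · intro c
    rw [hD c, hasg c]

-- the whole wave over the frontier list
theorem pvWave (board : List (List String)) (W H : Int) (ℓ : Nat) :
    ∀ (fs : List (Int × Int)) (dist : List (List Int)) (acc : List (Int × Int)),
      pvShape H W dist →
      pvShape H W ((fs.foldl (bExpand board W H ℓ) (dist, acc)).1)
      ∧ (∀ c : Int × Int, pvAsg board W H fs dist c →
          pvG2 ((fs.foldl (bExpand board W H ℓ) (dist, acc)).1) c.1 c.2 0 = (ℓ : Int) + 1)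
      ∧ (∀ c : Int × Int, pvIn H W c → ¬ pvAsg board W H fs dist c →
          pvG2 ((fs.foldl (bExpand board W H ℓ) (dist, acc)).1) c.1 c.2 0
            = pvG2 dist c.1 c.2 0)
      ∧ (∀ c : Int × Int, c ∈ (fs.foldl (bExpand board W H ℓ) (dist, acc)).2 ↔
          c ∈ acc ∨ pvAsg board W H fs dist c) := by
  intro fs
  induction fs with
  | nil =>
    intro dist acc hs
    refine ⟨hs, ?_, fun c _ _ => rfl, ?_⟩
    · rintro c ⟨-, -, -, f, hf, -⟩
      simp at hf
    · intro c
      unfold pvAsg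
      simp
  | cons f fs ih =>
    intro dist acc hs
    simp only [List.foldl_cons]
    obtain ⟨hS1, hB1, hC1, hD1⟩ := bExpand_char board W H ℓ f dist acc hs
    obtain ⟨hS, hB, hC, hD⟩ := ih (bExpand board W H ℓ (dist, acc) f).1
      (bExpand board W H ℓ (dist, acc) f).2 hS1
    rw [Prod.mk.eta] at hS hB hC hD
    have hwin : ∀ c : Int × Int, pvAsg board W H [f] dist c → pvIn H W c := fun c hc => hc.1
    refine ⟨hS, ?_, ?_, ?_⟩
    · intro c hca
      rcases (pvAsg_cons board W H f fs dist c).mp hca with h | h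
      · have hv1 := hB1 c h
        have := hC c (hwin c h)
          (fun hcon => by obtain ⟨-, hz, -, -⟩ := hcon; rw [hv1] at hz; omega)
        rw [this, hv1]
      · by_cases h0 : pvAsg board W H [f] dist c
        · have hv1 := hB1 c h0
          have := hC c (hwin c h0)
            (fun hcon => by obtain ⟨-, hz, -, -⟩ := hcon; rw [hv1] at hz; omega)
          rw [this, hv1]
        · have hv1 := hC1 c h.1 h0
          exact hB c ((pvAsg_congr board W H fs _ dist c hv1).mpr h)
    · intro c hc hnc
      rw [pvAsg_cons board W H f fs dist c] at hnc
      have hn1 : ¬ pvAsg board W H [f] dist c := fun h => hnc (Or.inl h)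
      have hn2 : ¬ pvAsg board W H fs dist c := fun h => hnc (Or.inr h)
      have hv1 := hC1 c hc hn1
      have := hC c hc (fun hcon => hn2 ((pvAsg_congr board W H fs _ dist c hv1).mp hcon))
      rw [this, hv1]
    · intro c
      rw [hD c, hD1 c, pvAsg_cons board W H f fs dist c]
      have htr : pvAsg board W H fs (bExpand board W H ℓ (dist, acc) f).1 c ↔
          (¬ pvAsg board W H [f] dist c ∧ pvAsg board W H fs dist c) := by
        constructor
        · intro h
          have hn1 : ¬ pvAsg board W H [f] dist c := by
            intro h0
            have hv := hB1 c h0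
            obtain ⟨-, hz, -, -⟩ := h
            rw [hv] at hz
            omega
          have hv1 := hC1 c h.1 hn1
          exact ⟨hn1, (pvAsg_congr board W H fs _ dist c hv1).mp h⟩
        · rintro ⟨hn1, h⟩
          have hv1 := hC1 c h.1 hn1
          exact (pvAsg_congr board W H fs _ dist c hv1).mpr h
      constructor
      · rintro ((h | h) | h)
        · exact Or.inl h
        · exact Or.inr (Or.inl h)
        · exact Or.inr (Or.inr (htr.mp h).2)
      · rintro (h | (h | h))
        · exact Or.inl (Or.inl h)
        · exact Or.inl (Or.inr h)
        · by_cases h0 : pvAsg board W H [f] dist c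
          · exact Or.inl (Or.inr h0)
          · exact Or.inr (htr.mpr ⟨h0, h⟩)

-- ---------- reading B's freshly built sweep grids ----------
theorem pvG2_natCast {α : Type} (g : List (List α)) (y x : Nat) (d : α)
    (hy : y < g.length) (hx : x < (g[y]'hy).length) :
    pvG2 g (y : Int) (x : Int) d = (g[y]'hy)[x]'hx := by
  unfold pvG2
  simp only [Int.toNat_natCast]
  rw [List.getD_eq_getElem _ _ hy, List.getD_eq_getElem _ _ hx]

-- two equally-shaped grids that agree on all window reads are equal
theorem pvGrid_ext (H W : Int) (g1 g2 : List (List Int))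
    (h1 : pvShape H W g1) (h2 : pvShape H W g2)
    (h : ∀ c : Int × Int, pvIn H W c → pvG2 g1 c.1 c.2 0 = pvG2 g2 c.1 c.2 0) : g1 = g2 := by
  apply List.ext_getElem (by rw [h1.1, h2.1])
  intro y hy1 hy2
  apply List.ext_getElem (by rw [h1.2 _ (List.getElem_mem hy1), h2.2 _ (List.getElem_mem hy2)])
  intro x hx1 hx2
  have hyH : y < H.toNat := by rw [← h1.1]; exact hy1
  have hxW : x < W.toNat := by
    rw [← h1.2 _ (List.getElem_mem hy1)]; exact hx1
  have hin : pvIn H W ((y : Int), (x : Int)) := ⟨by omega, by omega, by omega, by omega⟩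
  have := h ((y : Int), (x : Int)) hin
  rwa [pvG2_natCast g1 y x 0 hy1 hx1, pvG2_natCast g2 y x 0 hy2 hx2] at this

theorem pvShape_jSweep (board : List (List String)) (W H : Int) (dist : List (List Int)) :
    pvShape H W (jSweep board W H dist).1 := by
  unfold jSweep
  refine ⟨by simp, ?_⟩
  intro r hr
  dsimp only at hr
  obtain ⟨y, hy, rfl⟩ := List.mem_map.mp hr
  simp

theorem pvG2_jSweep (board : List (List String)) (W H : Int) (dist : List (List Int))
    (c : Int × Int) (hc : pvIn H W c) :
    pvG2 (jSweep board W H dist).1 c.1 c.2 0 = jCell board dist W H c.1 c.2 := by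
  obtain ⟨hc1, hc2, hc3, hc4⟩ := hc
  have hy : c.1.toNat < H.toNat := by omega
  have hx : c.2.toNat < W.toNat := by omega
  have hcy : ((c.1.toNat : Nat) : Int) = c.1 := Int.toNat_of_nonneg hc1
  have hcx : ((c.2.toNat : Nat) : Int) = c.2 := Int.toNat_of_nonneg hc3
  have h1 : c.1.toNat < ((jSweep board W H dist).1).length := by
    unfold jSweep; simpa using hy
  have h2 : c.2.toNat < (((jSweep board W H dist).1)[c.1.toNat]'h1).length := by
    unfold jSweep; simpa using hx
  have := pvG2_natCast ((jSweep board W H dist).1) c.1.toNat c.2.toNat 0 h1 h2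
  rw [hcy, hcx] at this
  rw [this]
  unfold jSweep
  simp only [List.getElem_map, List.getElem_range]
  rw [hcy, hcx]

-- the jMin fold computed when every qualifying neighbour carries value ℓ
theorem pvJMinFold (dist : List (List Int)) (W H : Int) (ℓ : Nat) :
    ∀ (ps : List (Int × Int)),
      (∀ n ∈ ps, 0 ≤ n.1 → n.1 < H → 0 ≤ n.2 → n.2 < W → pvG2 dist n.1 n.2 0 ≠ -1 →
        pvG2 dist n.1 n.2 0 = (ℓ : Int)) →
      ∀ b : Int, b = -1 ∨ b = (ℓ : Int) →
      ps.foldl (fun best p =>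
        if 0 ≤ p.1 ∧ p.1 < H ∧ 0 ≤ p.2 ∧ p.2 < W ∧ pvG2 dist p.1 p.2 0 ≠ -1 then
          if best = -1 ∨ pvG2 dist p.1 p.2 0 < best then pvG2 dist p.1 p.2 0 else best
        else best) b
      = if (∃ n ∈ ps, 0 ≤ n.1 ∧ n.1 < H ∧ 0 ≤ n.2 ∧ n.2 < W ∧ pvG2 dist n.1 n.2 0 ≠ -1)
        then (ℓ : Int) else b := by
  intro ps
  induction ps with
  | nil =>
    intro _ b _
    simp
  | cons n ps ih =>
    intro hall b hb
    simp only [List.foldl_cons]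
    by_cases hq : 0 ≤ n.1 ∧ n.1 < H ∧ 0 ≤ n.2 ∧ n.2 < W ∧ pvG2 dist n.1 n.2 0 ≠ -1
    · rw [if_pos hq]
      have hval : pvG2 dist n.1 n.2 0 = (ℓ : Int) :=
        hall n List.mem_cons_self hq.1 hq.2.1 hq.2.2.1 hq.2.2.2.1 hq.2.2.2.2
      have hstep : (if b = -1 ∨ pvG2 dist n.1 n.2 0 < b then pvG2 dist n.1 n.2 0 else b)
          = (ℓ : Int) := by
        rcases hb with rfl | rfl
        · rw [if_pos (Or.inl rfl), hval]
        · rw [hval]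
          split_ifs <;> rfl
      rw [hstep, ih (fun m hm => hall m (List.mem_cons_of_mem _ hm)) (ℓ : Int) (Or.inr rfl)]
      have hex : ∃ m ∈ n :: ps, 0 ≤ m.1 ∧ m.1 < H ∧ 0 ≤ m.2 ∧ m.2 < W ∧
          pvG2 dist m.1 m.2 0 ≠ -1 := ⟨n, List.mem_cons_self, hq⟩
      rw [if_pos hex]
      split_ifs <;> rfl
    · rw [if_neg hq, ih (fun m hm => hall m (List.mem_cons_of_mem _ hm)) b hb]
      have hiff : (∃ m ∈ n :: ps, 0 ≤ m.1 ∧ m.1 < H ∧ 0 ≤ m.2 ∧ m.2 < W ∧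
          pvG2 dist m.1 m.2 0 ≠ -1) ↔ (∃ m ∈ ps, 0 ≤ m.1 ∧ m.1 < H ∧ 0 ≤ m.2 ∧ m.2 < W ∧
          pvG2 dist m.1 m.2 0 ≠ -1) := by
        constructor
        · rintro ⟨m, hm, hcnd⟩
          rcases List.mem_cons.mp hm with rfl | hm'
          · exact absurd hcnd hq
          · exact ⟨m, hm', hcnd⟩
        · rintro ⟨m, hm, hcnd⟩
          exact ⟨m, List.mem_cons_of_mem _ hm, hcnd⟩
      rw [if_congr hiff rfl rfl]

-- jCell / jChg at a window cell under the wave invariants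
theorem pvJCell_char (board : List (List String)) (W H : Int) (ℓ : Nat)
    (dist : List (List Int)) (fs : List (Int × Int))
    (hf : ∀ f ∈ fs, pvIn H W f ∧ pvG2 dist f.1 f.2 0 = (ℓ : Int))
    (h4 : ∀ c : Int × Int, pvIn H W c → pvG2 dist c.1 c.2 0 = -1 →
      pvG2 board c.1 c.2 "" ≠ "x" →
      ∀ n ∈ jNbrs c.1 c.2, pvIn H W n → pvG2 dist n.1 n.2 0 ≠ -1 → n ∈ fs)
    (c : Int × Int) (hc : pvIn H W c) :
    (pvAsg board W H fs dist c → jCell board dist W H c.1 c.2 = (ℓ : Int) + 1)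
    ∧ (¬ pvAsg board W H fs dist c → jCell board dist W H c.1 c.2 = pvG2 dist c.1 c.2 0)
    ∧ (jChg board dist W H c.1 c.2 = true ↔ pvAsg board W H fs dist c) := by
  by_cases hvw : pvG2 dist c.1 c.2 0 = -1 ∧ pvG2 board c.1 c.2 "" ≠ "x"
  · have hex : (∃ n ∈ jNbrs c.1 c.2, 0 ≤ n.1 ∧ n.1 < H ∧ 0 ≤ n.2 ∧ n.2 < W ∧
        pvG2 dist n.1 n.2 0 ≠ -1) ↔ (∃ f ∈ fs, c ∈ jNbrs f.1 f.2) := by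
      constructor
      · rintro ⟨n, hn, hn1, hn2, hn3, hn4, hn5⟩
        have hmem := h4 c hc hvw.1 hvw.2 n hn ⟨hn1, hn2, hn3, hn4⟩ hn5
        exact ⟨n, hmem, (pvNbr_symm c n).mp hn⟩
      · rintro ⟨f, hffs, hcnb⟩
        obtain ⟨hfin, hfv⟩ := hf f hffs
        refine ⟨f, (pvNbr_symm c f).mpr hcnb, hfin.1, hfin.2.1, hfin.2.2.1, hfin.2.2.2, ?_⟩
        rw [hfv]
        omega
    have hall : ∀ n ∈ jNbrs c.1 c.2, 0 ≤ n.1 → n.1 < H → 0 ≤ n.2 → n.2 < W →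
        pvG2 dist n.1 n.2 0 ≠ -1 → pvG2 dist n.1 n.2 0 = (ℓ : Int) := by
      intro n hn h1 h2 h3 h4' h5
      exact (hf n (h4 c hc hvw.1 hvw.2 n hn ⟨h1, h2, h3, h4'⟩ h5)).2
    have hmin : jMin dist W H c.1 c.2
        = if (∃ n ∈ jNbrs c.1 c.2, 0 ≤ n.1 ∧ n.1 < H ∧ 0 ≤ n.2 ∧ n.2 < W ∧
            pvG2 dist n.1 n.2 0 ≠ -1) then (ℓ : Int) else -1 := by
      unfold jMin
      exact pvJMinFold dist W H ℓ (jNbrs c.1 c.2) hall (-1) (Or.inl rfl)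
    by_cases hadj : ∃ f ∈ fs, c ∈ jNbrs f.1 f.2
    · have hm : jMin dist W H c.1 c.2 = (ℓ : Int) := by
        rw [hmin, if_pos (hex.mpr hadj)]
      have hasg : pvAsg board W H fs dist c := ⟨hc, hvw.1, hvw.2, hadj⟩
      refine ⟨?_, fun hn => absurd hasg hn, ?_⟩
      · intro _
        unfold jCell
        dsimp only
        rw [if_pos hvw, hm, if_pos (by omega)]
      · constructor
        · intro _; exact hasg
        · intro _
          unfold jChg
          rw [decide_eq_true_iff]
          exact ⟨hvw.1, hvw.2, by rw [hm]; omega⟩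
    · have hm : jMin dist W H c.1 c.2 = -1 := by
        rw [hmin, if_neg (fun h => hadj (hex.mp h))]
      have hnasg : ¬ pvAsg board W H fs dist c := fun h => hadj h.2.2.2
      refine ⟨fun h => absurd h hnasg, ?_, ?_⟩
      · intro _
        unfold jCell
        dsimp only
        rw [if_pos hvw, hm, if_neg (by omega)]
      · constructor
        · intro h
          unfold jChg at h
          rw [decide_eq_true_iff] at h
          rw [hm] at h
          omega
        · intro h
          exact absurd h hnasg
  · have hnasg : ¬ pvAsg board W H fs dist c := fun h => hvw ⟨h.2.1, h.2.2.1⟩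
    refine ⟨fun h => absurd h hnasg, ?_, ?_⟩
    · intro _
      unfold jCell
      dsimp only
      rw [if_neg hvw]
    · constructor
      · intro h
        unfold jChg at h
        rw [decide_eq_true_iff] at h
        exact absurd ⟨h.1, h.2.1⟩ hvw
      · intro h
        exact absurd h hnasg

-- one sweep of B equals one wave of the level BFS, and `changed` ⟺ a nonempty next frontier
theorem pvSweepWave (board : List (List String)) (W H : Int) (ℓ : Nat)
    (dist : List (List Int)) (fs : List (Int × Int)) (hs : pvShape H W dist)
    (hf : ∀ f ∈ fs, pvIn H W f ∧ pvG2 dist f.1 f.2 0 = (ℓ : Int))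
    (h4 : ∀ c : Int × Int, pvIn H W c → pvG2 dist c.1 c.2 0 = -1 →
      pvG2 board c.1 c.2 "" ≠ "x" →
      ∀ n ∈ jNbrs c.1 c.2, pvIn H W n → pvG2 dist n.1 n.2 0 ≠ -1 → n ∈ fs) :
    (jSweep board W H dist).1 = (fs.foldl (bExpand board W H ℓ) (dist, [])).1
    ∧ ((jSweep board W H dist).2 = true ↔
        (fs.foldl (bExpand board W H ℓ) (dist, [])).2 ≠ []) := by
  obtain ⟨hws, hwb, hwc, hwd⟩ := pvWave board W H ℓ fs dist [] hs
  constructor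
  · apply pvGrid_ext H W _ _ (pvShape_jSweep board W H dist) hws
    intro c hc
    rw [pvG2_jSweep board W H dist c hc]
    obtain ⟨hcell1, hcell2, -⟩ := pvJCell_char board W H ℓ dist fs hf h4 c hc
    by_cases ha : pvAsg board W H fs dist c
    · rw [hcell1 ha, hwb c ha]
    · rw [hcell2 ha, hwc c hc ha]
  · have hchg : (jSweep board W H dist).2 = true ↔
        ∃ c : Int × Int, pvIn H W c ∧ pvAsg board W H fs dist c := by
      unfold jSweep
      dsimp only
      simp only [List.any_eq_true, List.mem_range]
      constructor
      · rintro ⟨y, hy, x, hx, hchg⟩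
        have hin : pvIn H W ((y : Int), (x : Int)) := ⟨by omega, by omega, by omega, by omega⟩
        obtain ⟨-, -, hc3⟩ := pvJCell_char board W H ℓ dist fs hf h4 ((y : Int), (x : Int)) hin
        exact ⟨((y : Int), (x : Int)), hin, hc3.mp hchg⟩
      · rintro ⟨c, hin, hasg⟩
        obtain ⟨hc1, hc2, hc3, hc4⟩ := id hin
        refine ⟨c.1.toNat, by omega, c.2.toNat, by omega, ?_⟩
        obtain ⟨-, -, hcc⟩ := pvJCell_char board W H ℓ dist fs hf h4 c hin
        have hy : ((c.1.toNat : Nat) : Int) = c.1 := Int.toNat_of_nonneg hc1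
        have hx : ((c.2.toNat : Nat) : Int) = c.2 := Int.toNat_of_nonneg hc3
        rw [hy, hx]
        exact hcc.mpr hasg
    rw [hchg]
    constructor
    · rintro ⟨c, -, hasg⟩
      have hmem : c ∈ (fs.foldl (bExpand board W H ℓ) (dist, [])).2 :=
        (hwd c).mpr (Or.inr hasg)
      exact List.ne_nil_of_mem hmem
    · intro hne
      obtain ⟨c, hmem⟩ := List.exists_mem_of_ne_nil _ hne
      rcases (hwd c).mp hmem with h | h
      · simp at h
      · exact ⟨c, h.1, h⟩

-- ---------- the level BFS equals B's sweep loop ----------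
theorem pvJacobi (board : List (List String)) (W H : Int) :
    ∀ (N : Nat) (dist : List (List Int)) (fs : List (Int × Int)) (ℓ : Nat),
      2 * pvCnt (fun v => decide (v = -1)) dist + 1 ≤ N →
      pvShape H W dist →
      (∀ f ∈ fs, pvIn H W f ∧ pvG2 dist f.1 f.2 0 = (ℓ : Int)) →
      (∀ c : Int × Int, pvIn H W c → pvG2 dist c.1 c.2 0 = -1 →
        pvG2 board c.1 c.2 "" ≠ "x" →
        ∀ n ∈ jNbrs c.1 c.2, pvIn H W n → pvG2 dist n.1 n.2 0 ≠ -1 → n ∈ fs) →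
      bLevels board W H dist fs ℓ = jLoop board W H dist := by
  intro N
  induction N with
  | zero =>
    intro dist fs ℓ hN
    exact absurd hN (by omega)
  | succ N ih =>
    intro dist fs ℓ hN hsh hf h4
    obtain ⟨hws, hwb, hwc, hwd⟩ := pvWave board W H ℓ fs dist [] hsh
    obtain ⟨hg, hchg⟩ := pvSweepWave board W H ℓ dist fs hsh hf h4
    conv_rhs => rw [jLoop]
    by_cases hfs : fs = []
    · subst hfs
      rw [bLevels, if_pos rfl]
      have hΔ : (([] : List (Int × Int)).foldl (bExpand board W H ℓ) (dist, [])).2 = [] := rfl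
      have hcf : ¬ (jSweep board W H dist).2 = true := fun h => (hchg.mp h) hΔ
      rw [dif_neg hcf, hg]
      rfl
    · rw [bLevels, if_neg hfs]
      by_cases hΔ : (fs.foldl (bExpand board W H ℓ) (dist, [])).2 = []
      · have hcf : ¬ (jSweep board W H dist).2 = true := fun h => (hchg.mp h) hΔ
        rw [dif_neg hcf, hg]
        dsimp only
        rw [hΔ, bLevels, if_pos rfl]
      · have hcf : (jSweep board W H dist).2 = true := hchg.mpr hΔ
        rw [dif_pos hcf, hg]
        dsimp only
        have hmeas := bFold_meas board W H ℓ fs (dist, [])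
        have hlen : 1 ≤ (fs.foldl (bExpand board W H ℓ) (dist, [])).2.length := by
          rcases hx : (fs.foldl (bExpand board W H ℓ) (dist, [])).2 with _ | ⟨c, cs⟩
          · exact absurd hx hΔ
          · simp
        apply ih
        · simp only [List.length_nil] at hmeas
          omega
        · exact hws
        · intro f' hf'
          rcases (hwd f').mp hf' with h | h
          · simp at h
          · refine ⟨h.1, ?_⟩
            rw [hwb f' h]
            push_cast
            ring
        · intro c hc h1 h2 n hn hnin hnne
          by_cases hna : pvAsg board W H fs dist n
          · exact (hwd n).mpr (Or.inr hna)
          · exfalso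
            have hnold : pvG2 dist n.1 n.2 0 ≠ -1 := by
              rw [hwc n hnin hna] at hnne
              exact hnne
            have hcasg : ¬ pvAsg board W H fs dist c := by
              intro hca
              have := hwb c hca
              rw [this] at h1
              omega
            have hcold : pvG2 dist c.1 c.2 0 = -1 := by
              rw [hwc c hc hcasg] at h1
              exact h1
            have hnfs : n ∈ fs := h4 c hc hcold h2 n hn hnin hnold
            apply hcasg
            exact ⟨hc, hcold, h2, n, hnfs, (pvNbr_symm c n).mp hn⟩

-- ---------- one source: A's BFS equals B's sweep loop ----------
theorem pvBFS_jLoop (board : List (List String)) (W H : Int) (s : Int × Int)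
    (hs : pvIn H W s) :
    aBFS board W H
        (pvS2 (List.replicate H.toNat (List.replicate W.toNat false)) s.1 s.2 true)
        (pvS2 (List.replicate H.toNat (List.replicate W.toNat (-1 : Int))) s.1 s.2 (0 : Int))
        [(s.1, s.2)]
      = jLoop board W H
          (pvS2 (List.replicate H.toNat (List.replicate W.toNat (-1 : Int))) s.1 s.2 (0 : Int)) := by
  rw [pvBFS_eq board W H s hs]
  obtain ⟨h1, h2, h3, h4⟩ := hs
  obtain ⟨hdy, hdx⟩ := pvRep_valid (H := H) (W := W) (-1 : Int) h1 h2 h3 h4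
  set dist0 := pvS2 (List.replicate H.toNat (List.replicate W.toNat (-1 : Int))) s.1 s.2 (0 : Int)
    with hd0
  have hsd : pvShape H W dist0 := pvShape_pvS2 (pvShape_replicate H W (-1 : Int)) _ _ _
  apply pvJacobi board W H (2 * pvCnt (fun v => decide (v = -1)) dist0 + 1) dist0
    [(s.1, s.2)] 0 (le_refl _) hsd
  · intro f hf
    rw [List.mem_singleton] at hf
    subst hf
    refine ⟨⟨h1, h2, h3, h4⟩, ?_⟩
    rw [hd0, pvG2_pvS2 _ s.1 s.2 s.1 s.2 (0 : Int) 0 hdy hdx, if_pos ⟨rfl, rfl⟩]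
    simp
  · intro c hc hcold hcnw n hn hnin hnne
    rw [List.mem_singleton]
    rw [hd0, pvG2_pvS2 _ s.1 s.2 n.1 n.2 (0 : Int) 0 hdy hdx] at hnne
    by_cases hts : n.1.toNat = s.1.toNat ∧ n.2.toNat = s.2.toNat
    · obtain ⟨hn1, hn2, hn3, hn4⟩ := hnin
      have he1 : n.1 = s.1 := by omega
      have he2 : n.2 = s.2 := by omega
      exact Prod.ext_iff.mpr ⟨he1, he2⟩
    · rw [if_neg hts] at hnne
      exfalso
      obtain ⟨hn1, hn2, hn3, hn4⟩ := hnin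
      rw [pvG2_replicate H W (-1 : Int) 0 n.1 n.2 hn1 hn2 hn3 hn4] at hnne
      exact hnne rfl

-- ---------- assembling the result matrix ----------
theorem pvS2_natCast (m : List (List Int)) (iN jN : Nat) (v : Int) :
    pvS2 m (iN : Int) (jN : Int) v = m.modify iN (fun r => r.set jN v) := by
  simp [pvS2]

theorem pvModify_modify {α : Type} (l : List α) (i : Nat) (f g : α → α) :
    (l.modify i f).modify i g = l.modify i (fun a => g (f a)) := by
  apply List.ext_getElem?
  intro k
  simp only [List.getElem?_modify]
  cases l[k]? <;> by_cases h : i = k <;> simp [h]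

theorem pvInnerFold (val1 : Nat → Int) (i : Nat) :
    ∀ (js : List Nat) (m : List (List Int)),
      js.foldl (fun m j => m.modify i (fun r => r.set j (val1 j))) m
        = m.modify i (fun r => js.foldl (fun r j => r.set j (val1 j)) r) := by
  intro js
  induction js with
  | nil =>
    intro m
    simp only [List.foldl_nil]
    apply List.ext_getElem?
    intro k
    rw [List.getElem?_modify]
    cases m[k]? <;> by_cases h : i = k <;> simp [h]
  | cons j js ih =>
    intro m
    simp only [List.foldl_cons]
    rw [ih, pvModify_modify]

theorem pvFoldSet_length (val1 : Nat → Int) :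
    ∀ (js : List Nat) (r : List Int),
      (js.foldl (fun r j => r.set j (val1 j)) r).length = r.length := by
  intro js
  induction js with
  | nil => intro r; rfl
  | cons j js ih => intro r; rw [List.foldl_cons, ih, List.length_set]

theorem pvSet_append {α : Type} :
    ∀ (l1 : List α) (a x : α) (l2 : List α),
      (l1 ++ a :: l2).set l1.length x = l1 ++ x :: l2 := by
  intro l1
  induction l1 with
  | nil => intro a x l2; rfl
  | cons b t ih => intro a x l2; simp only [List.cons_append, List.length_cons,
      List.set_cons_succ]; rw [ih]

theorem pvRowFill (val1 : Nat → Int) :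
    ∀ (nn : Nat) (r : List Int), nn ≤ r.length →
      (List.range nn).foldl (fun r j => r.set j (val1 j)) r
        = (List.range nn).map val1 ++ r.drop nn := by
  intro nn
  induction nn with
  | zero => intro r h; simp
  | succ n ihn =>
    intro r h
    rw [List.range_succ, List.foldl_append, List.foldl_cons, List.foldl_nil,
        ihn r (by omega)]
    have hd : r.drop n = r[n]'(by omega) :: r.drop (n + 1) :=
      List.drop_eq_getElem_cons (by omega)
    rw [hd]
    have hset := pvSet_append ((List.range n).map val1) (r[n]'(by omega)) (val1 n) (r.drop (n + 1))
    have hlen : ((List.range n).map val1).length = n := by simp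
    rw [hlen] at hset
    rw [hset, List.map_append, List.append_assoc]
    rfl

theorem pvMatLen (val : Nat → Nat → Int) (n : Nat) :
    ∀ (js : List Nat) (m : List (List Int)),
      (js.foldl (fun m i =>
          (List.range n).foldl (fun m j => m.modify i (fun r => r.set j (val i j))) m) m).length
        = m.length := by
  intro js
  induction js with
  | nil => intro m; rfl
  | cons i js ih =>
    intro m
    rw [List.foldl_cons, ih, pvInnerFold, List.length_modify]

theorem pvMatFill (val : Nat → Nat → Int) (n : Nat) :
    ∀ (js : List Nat) (m : List (List Int)), (∀ r ∈ m, r.length = n) →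
      ∀ (k : Nat), k < m.length →
      (js.foldl (fun m i =>
          (List.range n).foldl (fun m j => m.modify i (fun r => r.set j (val i j))) m) m)[k]?
        = if k ∈ js then some ((List.range n).map (val k)) else m[k]? := by
  intro js
  induction js with
  | nil => intro m hm k hk; simp
  | cons i js ih =>
    intro m hm k hk
    simp only [List.foldl_cons]
    rw [pvInnerFold]
    set m1 := m.modify i (fun r => (List.range n).foldl (fun r j => r.set j (val i j)) r) with hm1
    have hm1rows : ∀ r ∈ m1, r.length = n := by
      intro r hr
      rw [hm1] at hr
      obtain ⟨jj, hjj, rfl⟩ := List.mem_iff_getElem.mp hr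
      rw [List.getElem_modify]
      split
      · rw [pvFoldSet_length]; exact hm _ (List.getElem_mem _)
      · exact hm _ (List.getElem_mem _)
    have hlen1 : m1.length = m.length := by rw [hm1, List.length_modify]
    rw [ih m1 hm1rows k (by omega)]
    by_cases hkjs : k ∈ js
    · simp [hkjs]
    · simp only [if_neg hkjs]
      by_cases hki : k = i
      · subst hki
        rw [if_pos List.mem_cons_self]
        rw [hm1, List.getElem?_modify, List.getElem?_eq_getElem hk]
        show some (if k = k then List.foldl (fun r j => r.set j (val k j)) (m[k]'hk) (List.range n)
            else m[k]'hk) = _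
        rw [if_pos rfl]
        have hrk : (m[k]'hk).length = n := hm _ (List.getElem_mem _)
        rw [pvRowFill (val k) n (m[k]'hk) (le_of_eq hrk.symm)]
        rw [List.drop_eq_nil_of_le (by omega), List.append_nil]
      · rw [if_neg (by intro hc; rcases List.mem_cons.mp hc with h | h; exact hki h; exact hkjs h)]
        rw [hm1, List.getElem?_modify]
        cases m[k]? with
        | none => rfl
        | some r =>
          show some (if i = k then List.foldl (fun r j => r.set j (val i j)) r (List.range n)
              else r) = some r
          rw [if_neg (by omega)]

theorem pvFlagFold (P : Nat → Prop) [DecidablePred P] :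
    ∀ (js : List Nat) (b : Bool),
      js.foldl (fun f i => if P i then false else f) b
        = (b && js.all (fun i => !(decide (P i)))) := by
  intro js
  induction js with
  | nil => intro b; simp
  | cons j js ih =>
    intro b
    simp only [List.foldl_cons, List.all_cons]
    by_cases h : P j
    · rw [if_pos h, ih]
      simp [h]
    · rw [if_neg h, ih]
      simp [h]

theorem pvTakeMap {α β : Type} (f : α → β) (d : α) :
    ∀ (nn : Nat) (xs : List α), nn ≤ xs.length →
      (xs.take nn).map f = (List.range nn).map (fun j => f (xs.getD j d)) := by
  intro nn
  induction nn with
  | zero => intro xs h; simp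
  | succ n ihn =>
    intro xs h
    cases xs with
    | nil => simp at h
    | cons a t =>
      rw [List.take_succ_cons, List.map_cons, List.range_succ_eq_map, List.map_cons,
          List.map_map, ihn t (by simpa using h)]
      rfl

theorem pvCountContains (r : List Int) :
    (!decide (1 ≤ r.count (-1))) = !r.contains (-1) := by
  by_cases hm : (-1 : Int) ∈ r
  · have h1 : 1 ≤ r.count (-1) := List.count_pos_iff.mpr hm
    simp [h1, List.contains_eq_mem, hm]
  · have h0 : r.count (-1) = 0 := by rwa [List.count_eq_zero]
    simp [h0, List.contains_eq_mem, hm]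

theorem pvAllCongr {α : Type} (l : List α) (f g : α → Bool) (h : ∀ x ∈ l, f x = g x) :
    l.all f = l.all g := by
  induction l with
  | nil => rfl
  | cons a t ih =>
    simp only [List.all_cons]
    rw [h a List.mem_cons_self, ih (fun x hx => h x (List.mem_cons_of_mem _ hx))]

-- ===== VERDICT (by name: the statement is the Claim_ definition above) =====
theorem setDistanceBetweenDust_spec : Claim_equal_setDistanceBetweenDust := by
  intro board dust L W H hdom hpre
  obtain ⟨hL, hdust, hbrd⟩ := hpre
  unfold Spec_setDistanceBetweenDust setDistanceBetweenDust setDistanceBetweenDust_alt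
  by_cases hL0 : L ≤ 0
  · have hn0 : L.toNat = 0 := by omega
    simp only [PySem.List.pyRange_one_eq_nil hL0, List.foldl_nil, hn0, List.replicate_zero,
      List.all_nil]
  · have hL0' : (0 : Int) ≤ L := by omega
    have hnL : (L.toNat : Int) = L := Int.toNat_of_nonneg hL0'
    have hnd : L.toNat ≤ dust.length := by omega
    dsimp only
    simp only [PySem.List.pyRange_one, Int.sub_zero, zero_add, List.foldl_map,
      PySem.List.pyGetD_natCast, pvS2_natCast, PySem.List.slice_to (hb := hL0'),
      PySem.List.foldl_append_singleton_eq_map, List.nil_append, PySem.List.count_eq]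
    have hsrc : ∀ i : Nat, i < L.toNat → pvIn H W (dust.getD i (0, 0)) := by
      intro i hi
      have hil : i < dust.length := by omega
      have hid : dust.getD i (0, 0) = dust[i]'hil := List.getD_eq_getElem _ _ hil
      have hmem : dust[i]'hil ∈ dust.take L.toNat := by
        have hg : (dust.take L.toNat)[i]'(by simp; omega) = dust[i]'hil :=
          List.getElem_take
        rw [← hg]
        exact List.getElem_mem _
      have hb := hdust _ (hid ▸ hmem)
      exact ⟨hb.1, hb.2.1, hb.2.2.1, hb.2.2.2⟩
    have hdistEq : ∀ i : Nat, i < L.toNat →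
        aBFS board W H
            (pvS2 (List.replicate H.toNat (List.replicate W.toNat false))
              (dust.getD i (0, 0)).1 (dust.getD i (0, 0)).2 true)
            (pvS2 (List.replicate H.toNat (List.replicate W.toNat (-1 : Int)))
              (dust.getD i (0, 0)).1 (dust.getD i (0, 0)).2 (0 : Int))
            [((dust.getD i (0, 0)).1, (dust.getD i (0, 0)).2)]
          = jLoop board W H
              (pvS2 (List.replicate H.toNat (List.replicate W.toNat (-1 : Int)))
                (dust.getD i (0, 0)).1 (dust.getD i (0, 0)).2 (0 : Int)) :=
      fun i hi => pvBFS_jLoop board W H (dust.getD i (0, 0)) (hsrc i hi)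
    have hmatrows : ∀ r ∈ List.replicate L.toNat (List.replicate L.toNat (0 : Int)),
        r.length = L.toNat := by
      intro r hr
      rw [List.eq_of_mem_replicate hr]
      simp
    have hmat : List.foldl
          (fun m i =>
            List.foldl
              (fun m j =>
                m.modify i fun r =>
                  r.set j
                    (pvG2
                      (aBFS board W H
                        (pvS2 (List.replicate H.toNat (List.replicate W.toNat false))
                          (dust.getD i (0, 0)).1 (dust.getD i (0, 0)).2 true)
                        (pvS2 (List.replicate H.toNat (List.replicate W.toNat (-1 : Int)))
                          (dust.getD i (0, 0)).1 (dust.getD i (0, 0)).2 (0 : Int))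
                        [((dust.getD i (0, 0)).1, (dust.getD i (0, 0)).2)])
                      (dust.getD j (0, 0)).1 (dust.getD j (0, 0)).2 0))
              m (List.range L.toNat))
          (List.replicate L.toNat (List.replicate L.toNat (0 : Int))) (List.range L.toNat)
        = List.map
            (fun i =>
              List.map
                (fun j =>
                  pvG2
                    (aBFS board W H
                      (pvS2 (List.replicate H.toNat (List.replicate W.toNat false))
                        (dust.getD i (0, 0)).1 (dust.getD i (0, 0)).2 true)
                      (pvS2 (List.replicate H.toNat (List.replicate W.toNat (-1 : Int)))
                        (dust.getD i (0, 0)).1 (dust.getD i (0, 0)).2 (0 : Int))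
                      [((dust.getD i (0, 0)).1, (dust.getD i (0, 0)).2)])
                    (dust.getD j (0, 0)).1 (dust.getD j (0, 0)).2 0)
                (List.range L.toNat))
            (List.range L.toNat) := by
      apply List.ext_getElem?
      intro k
      by_cases hk : k < L.toNat
      · rw [pvMatFill _ L.toNat (List.range L.toNat) _ hmatrows k (by simp [hk]),
            if_pos (List.mem_range.mpr hk), List.getElem?_map, List.getElem?_range hk]
        rfl
      · rw [List.getElem?_eq_none (by rw [pvMatLen]; simp; omega),
            List.getElem?_eq_none (by simp; omega)]
    rw [hmat]
    have hrow : ∀ i ∈ List.range L.toNat,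
        List.map
            (fun t =>
              pvG2
                (jLoop board W H
                  (pvS2 (List.replicate H.toNat (List.replicate W.toNat (-1 : Int)))
                    (dust.getD i (0, 0)).1 (dust.getD i (0, 0)).2 (0 : Int)))
                t.1 t.2 0)
            (List.take L.toNat dust)
          = List.map
              (fun j =>
                pvG2
                  (aBFS board W H
                    (pvS2 (List.replicate H.toNat (List.replicate W.toNat false))
                      (dust.getD i (0, 0)).1 (dust.getD i (0, 0)).2 true)
                    (pvS2 (List.replicate H.toNat (List.replicate W.toNat (-1 : Int)))
                      (dust.getD i (0, 0)).1 (dust.getD i (0, 0)).2 (0 : Int))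
                    [((dust.getD i (0, 0)).1, (dust.getD i (0, 0)).2)])
                  (dust.getD j (0, 0)).1 (dust.getD j (0, 0)).2 0)
              (List.range L.toNat) := by
      intro i hi
      rw [← hdistEq i (List.mem_range.mp hi)]
      exact pvTakeMap _ (0, 0) L.toNat dust hnd
    rw [List.map_congr_left hrow]
    simp only [Prod.mk.injEq]
    refine ⟨by trivial, ?_⟩
    rw [pvFlagFold]
    simp only [Bool.true_and, List.all_map]
    apply pvAllCongr
    intro k hk
    have hkn : k < L.toNat := List.mem_range.mp hk
    have hXk : (List.map
          (fun i =>
            List.map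
              (fun j =>
                pvG2
                  (aBFS board W H
                    (pvS2 (List.replicate H.toNat (List.replicate W.toNat false))
                      (dust.getD i (0, 0)).1 (dust.getD i (0, 0)).2 true)
                    (pvS2 (List.replicate H.toNat (List.replicate W.toNat (-1 : Int)))
                      (dust.getD i (0, 0)).1 (dust.getD i (0, 0)).2 (0 : Int))
                    [((dust.getD i (0, 0)).1, (dust.getD i (0, 0)).2)])
                  (dust.getD j (0, 0)).1 (dust.getD j (0, 0)).2 0)
              (List.range L.toNat))
          (List.range L.toNat)).getD k []
        = List.map
            (fun j =>
              pvG2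
                (aBFS board W H
                  (pvS2 (List.replicate H.toNat (List.replicate W.toNat false))
                    (dust.getD k (0, 0)).1 (dust.getD k (0, 0)).2 true)
                  (pvS2 (List.replicate H.toNat (List.replicate W.toNat (-1 : Int)))
                    (dust.getD k (0, 0)).1 (dust.getD k (0, 0)).2 (0 : Int))
                  [((dust.getD k (0, 0)).1, (dust.getD k (0, 0)).2)])
                (dust.getD j (0, 0)).1 (dust.getD j (0, 0)).2 0)
            (List.range L.toNat) := by
      rw [List.getD_eq_getElem _ _ (by simp [hkn])]
      simp
    rw [hXk]
    exact pvCountContains _
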